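-- pv_equiv track=rewrite | github.com/theamankumarsingh/advent-of-code-2025 | Day 4/4-2.py | solve
-- ===== SOURCE A (Python) =====
-- def solve(lines):
--     matrix = [list(map(lambda x: 0 if x == "." else 1, line)) for line in lines] # replacing '.' with 0 and '@' with 1 for direct calculations
--     matrix = [[0]*(len(matrix[0])+2)] + [[0] + row + [0] for row in matrix] + [[0]*(len(matrix[0])+2)] # Add padding to matrix
--
--     count = 0
--     while True: # Repeat until no more changes
--         changed_indices = [] # To track which cells to change
--         for r in range(1,len(matrix)-1):
--             for c in range(1,len(matrix[0])-1):
--                 if matrix[r][c]==0: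
--                     continue
--                 submatrix = [row[c-1:c+2] for row in matrix[r-1:r+2]] # Extract 3x3 submatrix
--                 if sum([sum(row) for row in submatrix]) <= 4: # Includes the center cell, thus has to be <= 4 instead of < 4
--                     changed_indices.append((r,c))
--                     count += 1
--         if not changed_indices:
--             break
--         for r,c in changed_indices:
--             matrix[r][c] = 0
--
--     return count
-- ===== SOURCE B (Python) =====
-- def solve(lines):
--     # Event-driven erosion: compute each cell's live-neighbor count once, then
--     # peel cells with a worklist, decrementing neighbors' counts as cells fall.
--     w = len(lines[0])
--     live = {(r, c) for r, line in enumerate(lines)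
--             for c, ch in enumerate(line) if ch != "."}
--
--     def nbrs(r, c):
--         return [(r + dr, c + dc)
--                 for dr in (-1, 0, 1) for dc in (-1, 0, 1) if dr or dc]
--
--     # live cells inside the grid's width (set by the first line), with counts
--     deg = {(r, c): sum(q in live for q in nbrs(r, c))
--            for r, line in enumerate(lines)
--            for c, ch in enumerate(line[:w]) if ch != "."}
--     stack = [p for p in deg if deg[p] < 4]
--     gone = set(stack)
--     while stack:
--         r, c = stack.pop()
--         for q in nbrs(r, c):
--             if q in deg and q not in gone:
--                 deg[q] -= 1
--                 if deg[q] < 4: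
--                     gone.add(q)
--                     stack.append(q)
--     return len(gone)
-- ===== Notes on version B (the rewrite author's own statement) =====
-- stated objective: alternative
-- what changed: A repeatedly rescans the whole padded 0/1 matrix, recomputing every live cell's 3x3 submatrix sum on each pass until a pass removes nothing; B computes each cell's live-neighbor count once and then runs an event-driven worklist that decrements neighbors' counts as cells fall and pushes cells whose count drops below 4 (the peeling order provably does not change the removal count).
import Mathlib
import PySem

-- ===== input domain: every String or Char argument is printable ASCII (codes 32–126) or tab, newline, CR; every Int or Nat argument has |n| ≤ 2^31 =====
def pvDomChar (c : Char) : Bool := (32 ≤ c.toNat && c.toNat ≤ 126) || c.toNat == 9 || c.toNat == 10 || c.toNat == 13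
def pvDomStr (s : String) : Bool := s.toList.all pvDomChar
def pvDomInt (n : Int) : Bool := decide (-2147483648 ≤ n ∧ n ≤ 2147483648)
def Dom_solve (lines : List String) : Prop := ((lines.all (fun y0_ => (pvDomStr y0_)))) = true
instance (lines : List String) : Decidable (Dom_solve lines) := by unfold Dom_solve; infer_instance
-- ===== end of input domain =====

-- B replaces A's repeated full-grid passes by an event-driven erosion: each cell's
-- live-neighbor count is computed once, and a worklist peels cells whose count drops
-- below 4, decrementing their neighbors' counts; the removal count is pass-order
-- independent, so it equals A's synchronous count.

-- ===== PORT A =====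
def cellInt (x : Char) : Int := if x == '.' then 0 else 1

-- matrix[r][c] (r, c nonnegative here)
def readA (m : List (List Int)) (r c : Int) : Int :=
  PySem.List.pyGetD (PySem.List.pyGetD m r []) c 0

-- sum([sum(row) for row in [row[c-1:c+2] for row in matrix[r-1:r+2]]])
def subSum (m : List (List Int)) (r c : Int) : Int :=
  ((PySem.List.slice m (some (r-1)) (some (r+2))).map
    (fun row => (PySem.List.slice row (some (c-1)) (some (c+2))).sum)).sum

-- the double for-loop collecting changed_indices and incrementing count
def scanA (m : List (List Int)) (st : List (Int × Int) × Int) : List (Int × Int) × Int :=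
  (PySem.List.pyRange 1 ((m.length : Int) - 1) 1).foldl (fun st1 r =>
    (PySem.List.pyRange 1 (((m.headD []).length : Int) - 1) 1).foldl (fun st2 c =>
      if readA m r c == 0 then st2
      else if subSum m r c <= 4 then (st2.1 ++ [(r, c)], st2.2 + 1) else st2) st1) st

-- matrix[r][c] = 0
def setZero (m : List (List Int)) (p : Int × Int) : List (List Int) :=
  PySem.List.pySetD m p.1 (PySem.List.pySetD (PySem.List.pyGetD m p.1 []) p.2 0)

-- while True: ... (the fuel, one unit per pass, only makes the loop total: every pass
-- before the last removes at least one cell, so cell count + 1 passes always suffice)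
def solveLoopA : Nat -> List (List Int) -> Int -> Int
  | 0, _, count => count
  | fuel + 1, m, count =>
    let st := scanA m ([], count)
    if st.1 = [] then st.2
    else solveLoopA fuel (st.1.foldl setZero m) st.2

def solve (lines : List String) : Int :=
  let matrix0 := lines.map (fun line => line.toList.map cellInt)
  let w := (matrix0.headD []).length   -- len(matrix[0]); Pre_ excludes lines = []
  let matrix := List.replicate (w + 2) (0 : Int)
      :: matrix0.map (fun row => (0 : Int) :: row ++ [0])
      ++ [List.replicate (w + 2) (0 : Int)]
  solveLoopA (matrix.flatten.length + 1) matrix 0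

-- ===== PORT B =====
-- the 8 neighbor positions: [(r+dr, c+dc) for dr in (-1,0,1) for dc in (-1,0,1) if dr or dc]
def nbrsB (r c : Int) : List (Int × Int) :=
  ([-1, 0, 1] : List Int).flatMap (fun dr =>
    (([-1, 0, 1] : List Int).filter (fun dc => !(dr == 0 && dc == 0))).map
      (fun dc => (r + dr, c + dc)))

-- {(r, c) for r, line in enumerate(lines) for c, ch in enumerate(line) if ch != '.'}
def liveB (lines : List String) : PySem.Set (Int × Int) :=
  PySem.Set.ofList ((PySem.List.enumerate lines 0).flatMap (fun rl =>
    (PySem.List.enumerate rl.2.toList 0).filterMap (fun cc =>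
      if cc.2 ≠ '.' then some (rl.1, cc.1) else none)))

-- sum(q in live for q in nbrs(r, c))
def cntLiveB (live : PySem.Set (Int × Int)) (p : Int × Int) : Int :=
  ((nbrsB p.1 p.2).map (fun q => if PySem.Set.contains live q then (1 : Int) else 0)).sum

-- {(r, c): sum(q in live for q in nbrs(r, c)) for r, line ... for c, ch in enumerate(line[:w]) if ch != '.'}
def degB (lines : List String) (w : Nat) (live : PySem.Set (Int × Int)) :
    PySem.Dict (Int × Int) Int :=
  ((PySem.List.enumerate lines 0).flatMap (fun rl =>
    (PySem.List.enumerate (rl.2.toList.take w) 0).filterMap (fun cc =>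
      if cc.2 ≠ '.' then some (rl.1, cc.1) else none))).foldl
    (fun d p => d.insert p (cntLiveB live p))
    PySem.Dict.empty

-- body of 'for q in nbrs(r, c): ...' on the state (stack, deg, gone)
def innerB (s : List (Int × Int) × PySem.Dict (Int × Int) Int × PySem.Set (Int × Int))
    (q : Int × Int) :
    List (Int × Int) × PySem.Dict (Int × Int) Int × PySem.Set (Int × Int) :=
  if s.2.1.contains q && !(PySem.Set.contains s.2.2 q) then
    let d := s.2.1.modify q 0 (fun v => v - 1)
    if d.getD q 0 < 4 then (s.1 ++ [q], d, PySem.Set.add s.2.2 q)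
    else (s.1, d, s.2.2)
  else s

-- while stack: p = stack.pop(); ...  (fuel only makes the loop total: each iteration
-- pops one cell and marked cells are never re-pushed, so |deg| + 1 iterations suffice)
def loopB : Nat -> List (Int × Int) -> PySem.Dict (Int × Int) Int -> PySem.Set (Int × Int) ->
    PySem.Set (Int × Int)
  | 0, _, _, gone => gone
  | fuel + 1, st, deg, gone =>
    match st.getLast? with
    | none => gone
    | some p =>
      let s := (nbrsB p.1 p.2).foldl innerB (st.dropLast, deg, gone)
      loopB fuel s.1 s.2.1 s.2.2

def solve_alt (lines : List String) : Int :=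
  let w := (lines.headD "").toList.length   -- len(lines[0]); Pre_ excludes lines = []
  let live := liveB lines
  let deg := degB lines w live
  let stack := deg.keys.filter (fun p => decide (deg.getD p 0 < 4))
  let gone := PySem.Set.ofList stack
  ((loopB (deg.size + 1) stack deg gone).length : Int)

-- ===== PRECONDITION & SPEC =====
-- Pre_ excludes exactly the inputs on which A raises IndexError: the empty list (len(lines[0]))
-- and inputs where some line is more than one character shorter than the first line.
def Pre_solve (lines : List String) : Prop :=
  lines ≠ [] ∧ ∀ l ∈ lines, ((lines.headD "").toList.length : Int) - 1 ≤ (l.toList.length : Int)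
instance (lines : List String) : Decidable (Pre_solve lines) := by unfold Pre_solve; infer_instance
def pvWitness_solve : List String := ["@@.", ".@@", "@.@"]

def Spec_solve (lines : List String) (out : Int) : Prop := out = solve_alt lines
instance (lines : List String) (out : Int) : Decidable (Spec_solve lines out) := by unfold Spec_solve; infer_instance

-- ===== CLAIM (what is proved, stated in full; the proofs are below) =====
def Claim_equal_solve : Prop := ∀ (lines : List String), Dom_solve lines → Pre_solve lines → Spec_solve lines (solve lines)

-- ===== LEMMAS AND PROOFS =====

-- ---- A-side: the padded grid as a function of the set of live erodible cells ----
def cellVal (L : List (List Char)) (r c : Nat) : Int :=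
  if (L.getD r []).getD c '.' == '.' then 0 else 1

def vOf (L : List (List Char)) (w : Nat) (S : List (Int × Int)) (r c : Nat) : Int :=
  if c < w then (if ((r : Int), (c : Int)) ∈ S then 1 else 0) else cellVal L r c

def padGrid (L : List (List Char)) (w : Nat) (v : Nat → Nat → Int) : List (List Int) :=
  List.replicate (w + 2) 0 ::
    ((List.range L.length).map (fun r =>
      (0 : Int) :: (List.range ((L.getD r []).length)).map (v r) ++ [0])
     ++ [List.replicate (w + 2) 0])

def okS (L : List (List Char)) (w : Nat) (S : List (Int × Int)) : Prop :=
  S.Nodup ∧ ∀ p ∈ S, ∃ r c : Nat,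
    p = ((r : Int), (c : Int)) ∧ r < L.length ∧ c < (L.getD r []).length ∧ c < w

def okBd (L : List (List Char)) (w : Nat) (Bd : List (Int × Int)) : Prop :=
  ∀ p, p ∈ Bd ↔ ∃ r : Nat, p = ((r : Int), (w : Int)) ∧ r < L.length ∧
    w < (L.getD r []).length ∧ (L.getD r []).getD w '.' ≠ '.'

-- the 8 offsets, and the synchronous neighbor count (the shape A's pass computes)
def offsetsB : List (Int × Int) :=
  ([-1, 0, 1] : List Int).flatMap (fun dr =>
    (([-1, 0, 1] : List Int).filter (fun dc => !(dr == 0 && dc == 0))).map (fun dc => (dr, dc)))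

def neighB (active border : List (Int × Int)) (p : Int × Int) : Int :=
  (offsetsB.map (fun o =>
    if (p.1 + o.1, p.2 + o.2) ∈ active ∨ (p.1 + o.1, p.2 + o.2) ∈ border then (1 : Int) else 0)).sum

-- the synchronous pass loop A's grid loop is first reduced to
def solveLoopB (total : Int) (border : List (Int × Int)) : Nat → List (Int × Int) → Int
  | 0, active => total - (active.length : Int)
  | fuel + 1, active =>
    let survivors := active.filter (fun p => decide ((4 : Int) ≤ neighB active border p))
    if survivors.length = active.length then total - (active.length : Int)
    else solveLoopB total border fuel survivors

lemma length_padGrid (L : List (List Char)) (w : Nat) (v : Nat → Nat → Int) :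
    (padGrid L w v).length = L.length + 2 := by
  simp [padGrid]

lemma headD_padGrid (L : List (List Char)) (w : Nat) (v : Nat → Nat → Int) :
    (padGrid L w v).headD [] = List.replicate (w + 2) 0 := rfl

lemma padGrid_congr {L : List (List Char)} {w : Nat} {v v' : Nat → Nat → Int}
    (h : ∀ r c, r < L.length → c < (L.getD r []).length → v r c = v' r c) :
    padGrid L w v = padGrid L w v' := by
  unfold padGrid
  congr 1
  congr 1
  apply List.map_congr_left
  intro r hr
  rw [List.mem_range] at hr
  congr 1
  congr 1
  exact List.map_congr_left fun c hc => h r c hr (List.mem_range.mp hc)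

-- sum of a 3-window slice, with out-of-range entries read as 0
lemma sum_take3 (m : List Int) : (m.take 3).sum = m.getD 0 0 + m.getD 1 0 + m.getD 2 0 := by
  rcases m with _ | ⟨x, _ | ⟨y, _ | ⟨z, t⟩⟩⟩ <;> simp [List.getD] <;> ring
lemma getD_drop (l : List Int) (a k : Nat) : (l.drop a).getD k 0 = l.getD (a + k) 0 := by
  simp [List.getD, List.getElem?_drop]
lemma sum_take3_drop (l : List Int) (a : Nat) :
    ((l.drop a).take 3).sum = l.getD a 0 + l.getD (a + 1) 0 + l.getD (a + 2) 0 := by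
  rw [sum_take3, getD_drop, getD_drop, getD_drop, Nat.add_zero]
lemma drop_take3 (l : List (List Int)) (k : Nat) (h : k + 3 ≤ l.length) :
    (l.drop k).take 3 = [l.getD k [], l.getD (k + 1) [], l.getD (k + 2) []] := by
  have h0 : k < l.length := by omega
  have h1 : k + 1 < l.length := by omega
  have h2 : k + 2 < l.length := by omega
  rw [List.drop_eq_getElem_cons h0, List.drop_eq_getElem_cons h1, List.drop_eq_getElem_cons h2,
    List.take_succ_cons, List.take_succ_cons, List.take_succ_cons, List.take_zero]
  simp only [List.getD, List.getElem?_eq_getElem, h0, h1, h2, Option.getD_some]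

lemma mem_S_coords {L : List (List Char)} {w : Nat} {S : List (Int × Int)} (hS : okS L w S)
    {ri ci : Int} (h : (ri, ci) ∈ S) :
    ∃ r c : Nat, ri = r ∧ ci = c ∧ r < L.length ∧ c < (L.getD r []).length ∧ c < w := by
  obtain ⟨r, c, hp, h1, h2, h3⟩ := hS.2 _ h
  exact ⟨r, c, (Prod.mk.injEq _ _ _ _ ▸ hp).1, (Prod.mk.injEq _ _ _ _ ▸ hp).2, h1, h2, h3⟩

lemma getD_replicate_zero (n j : Nat) : (List.replicate n (0 : Int)).getD j 0 = 0 := by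
  rcases Nat.lt_or_ge j n with h | h
  · rw [List.getD_eq_getElem _ _ (by simpa using h)]
    simp
  · rw [List.getD_eq_default _ _ (by simpa using h)]

lemma read_memInd (L : List (List Char)) (w : Nat) (S Bd : List (Int × Int))
    (hS : okS L w S) (hBd : okBd L w Bd) (i j : Nat) (hj : j ≤ w + 1) :
    ((padGrid L w (vOf L w S)).getD i []).getD j 0
      = if (((i : Int) - 1, (j : Int) - 1) ∈ S ∨ ((i : Int) - 1, (j : Int) - 1) ∈ Bd)
        then 1 else 0 := by
  have hnegS : ∀ (ri ci : Int), (ri, ci) ∈ S →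
      0 ≤ ri ∧ ri < L.length ∧ 0 ≤ ci ∧ ci < w := by
    intro ri ci h
    obtain ⟨r, c, h1, h2, h3, _, h5⟩ := mem_S_coords hS h
    subst h1; subst h2
    exact ⟨Int.natCast_nonneg r, by exact_mod_cast h3, Int.natCast_nonneg c, by exact_mod_cast h5⟩
  have hnegB : ∀ (ri ci : Int), (ri, ci) ∈ Bd →
      0 ≤ ri ∧ ri < L.length ∧ ci = w := by
    intro ri ci h
    obtain ⟨r, hp, h1, _, _⟩ := (hBd _).mp h
    rw [Prod.mk.injEq] at hp
    obtain ⟨hpa, hpb⟩ := hp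
    subst hpa; subst hpb
    exact ⟨Int.natCast_nonneg r, by exact_mod_cast h1, rfl⟩
  have zero_case : ∀ (ri ci : Int),
      (∀ r c : Nat, r < L.length → c < (L.getD r []).length → c < w → ¬((ri, ci) = ((r : Int), (c : Int)))) →
      (∀ r : Nat, r < L.length → w < (L.getD r []).length → ¬((ri, ci) = ((r : Int), (w : Int)))) →
      (if ((ri, ci) ∈ S ∨ (ri, ci) ∈ Bd) then (1 : Int) else 0) = 0 := by
    intro ri ci hA hB
    rw [if_neg]
    rintro (h | h)
    · obtain ⟨r, c, h1, h2, h3, h4, h5⟩ := mem_S_coords hS h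
      exact hA r c h3 h4 h5 (by rw [h1, h2])
    · obtain ⟨r, hp, h1, h2, _⟩ := (hBd _).mp h
      exact hB r h1 h2 hp
  rcases i with _ | k
  · simp only [padGrid, List.getD_cons_zero]
    rw [getD_replicate_zero, eq_comm]
    apply zero_case
    · intro r c _ _ _ heq
      simp only [Prod.mk.injEq] at heq
      omega
    · intro r _ _ heq
      simp only [Prod.mk.injEq] at heq
      omega
  · simp only [padGrid, List.getD_cons_succ]
    by_cases hk : k < L.length
    · rw [List.getD_append _ _ _ _ (by simpa using hk), PySem.List.getD_map_range _ _ _ _ hk]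
      rcases j with _ | j'
      · show ((0 : Int) :: (List.map (vOf L w S k) (List.range (L.getD k []).length) ++ [0])).getD 0 0 = _
        simp only [List.getD_cons_zero]
        rw [eq_comm]
        apply zero_case
        · intro r c _ _ _ heq
          simp only [Prod.mk.injEq] at heq
          omega
        · intro r _ _ heq
          simp only [Prod.mk.injEq] at heq
          omega
      · show ((0 : Int) :: (List.map (vOf L w S k) (List.range (L.getD k []).length) ++ [0])).getD (j' + 1) 0 = _
        simp only [List.getD_cons_succ]
        by_cases hj' : j' < (L.getD k []).length
        · rw [List.getD_append _ _ _ _ (by simpa using hj'), PySem.List.getD_map_range _ _ _ _ hj']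
          have hcast : ((k + 1 : Nat) : Int) - 1 = (k : Int) := by push_cast; ring
          have hcast2 : ((j' + 1 : Nat) : Int) - 1 = (j' : Int) := by push_cast; ring
          rw [hcast, hcast2]
          by_cases hw : j' < w
          · rw [vOf, if_pos hw]
            have hnB : ((k : Int), (j' : Int)) ∉ Bd := by
              intro h
              obtain ⟨-, -, hc⟩ := hnegB _ _ h
              rw [Int.natCast_inj.mp hc] at hw
              omega
            by_cases hmem : ((k : Int), (j' : Int)) ∈ S
            · rw [if_pos hmem, if_pos (Or.inl hmem)]
            · rw [if_neg hmem, if_neg (by rintro (h | h); exact hmem h; exact hnB h)]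
          · have hjw : j' = w := by omega
            subst hjw
            rw [vOf, if_neg hw]
            have hnS : ((k : Int), (j' : Int)) ∉ S := by
              intro h
              obtain ⟨-, -, -, hcw⟩ := hnegS _ _ h
              omega
            have hBdiff : (((k : Int), (j' : Int)) ∈ Bd) ↔ (L.getD k []).getD j' '.' ≠ '.' := by
              rw [hBd]
              constructor
              · rintro ⟨r, hp, -, -, hne⟩
                rw [Prod.mk.injEq] at hp
                rwa [Int.natCast_inj.mp hp.1]
              · intro hne
                exact ⟨k, rfl, hk, hj', hne⟩
            rw [cellVal]
            by_cases hc : (L.getD k []).getD j' '.' = '.'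
            · simp only [hc, BEq.rfl, if_true]
              rw [eq_comm, if_neg]
              rintro (h | h)
              · exact hnS h
              · exact (hBdiff.mp h) hc
            · rw [if_neg (by simpa using hc), if_pos (Or.inr (hBdiff.mpr hc))]
        · have hval : ((List.map (vOf L w S k) (List.range (L.getD k []).length) ++ [0]).getD j' 0) = 0 := by
            rcases Nat.lt_or_ge j' ((L.getD k []).length + 1) with hlt | hge
            · have hj'' : j' = (L.getD k []).length := by omega
              subst hj''
              rw [List.getD_append_right _ _ _ _ (by simp)]
              simp
            · rw [List.getD_eq_default _ _ (by simp [List.getD] at hge ⊢; omega)]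
          rw [hval, eq_comm]
          apply zero_case
          · intro r c hrl hcl hcw heq
            simp only [Prod.mk.injEq] at heq
            have hkr : k = r := by exact_mod_cast (by omega : ((k : Int)) = (r : Int))
            have hjc : j' = c := by exact_mod_cast (by omega : ((j' : Int)) = (c : Int))
            subst hkr; subst hjc
            omega
          · intro r hrl hwl heq
            simp only [Prod.mk.injEq] at heq
            have hkr : k = r := by exact_mod_cast (by omega : ((k : Int)) = (r : Int))
            have hjc : j' = w := by exact_mod_cast (by omega : ((j' : Int)) = (w : Int))
            subst hkr
            omega
    · by_cases hkR : k = L.length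
      · rw [List.getD_append_right _ _ _ _ (by simp [hkR])]
        simp only [List.length_map, List.length_range, hkR, Nat.sub_self,
          List.getD_cons_zero]
        rw [getD_replicate_zero, eq_comm]
        apply zero_case
        · intro r c _ _ _ heq
          simp only [Prod.mk.injEq] at heq
          omega
        · intro r _ _ heq
          simp only [Prod.mk.injEq] at heq
          omega
      · have hz : ∀ (ll : List (List Int)), ll.length ≤ k → (ll.getD k []).getD j 0 = 0 := by
          intro ll h
          rw [List.getD_eq_default _ _ h]
          rfl
        refine Eq.trans (hz _ (by simp; omega)) ?_
        rw [eq_comm]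
        apply zero_case
        · intro r c _ _ _ heq
          simp only [Prod.mk.injEq] at heq
          omega
        · intro r _ _ heq
          simp only [Prod.mk.injEq] at heq
          omega

def mInd (S Bd : List (Int × Int)) (a b : Int) : Int :=
  if ((a, b) ∈ S ∨ (a, b) ∈ Bd) then 1 else 0

lemma neighB_expand (S Bd : List (Int × Int)) (a b : Int) : neighB S Bd (a, b) =
    mInd S Bd (a - 1) (b - 1) + mInd S Bd (a - 1) b + mInd S Bd (a - 1) (b + 1) +
    mInd S Bd a (b - 1) + mInd S Bd a (b + 1) +
    mInd S Bd (a + 1) (b - 1) + mInd S Bd (a + 1) b + mInd S Bd (a + 1) (b + 1) := by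
  show (offsetsB.map _).sum = _
  rw [show offsetsB = [(-1, -1), (-1, 0), (-1, 1), (0, -1), (0, 1), (1, -1), (1, 0), (1, 1)] from rfl]
  simp only [List.map_cons, List.map_nil, List.sum_cons, List.sum_nil, mInd]
  norm_num [Int.sub_eq_add_neg]
  ring

lemma subSum_eq (L : List (List Char)) (w : Nat) (S Bd : List (Int × Int))
    (hS : okS L w S) (hBd : okBd L w Bd) (k j : Nat) (hk : k < L.length) (hjw : j < w)
    (hmem : ((k : Int), (j : Int)) ∈ S) :
    subSum (padGrid L w (vOf L w S)) ((k : Int) + 1) ((j : Int) + 1)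
      = 1 + neighB S Bd ((k : Int), (j : Int)) := by
  set m := padGrid L w (vOf L w S) with hm
  rw [subSum]
  rw [show (k : Int) + 1 - 1 = ((k : Nat) : Int) by ring,
      show (k : Int) + 1 + 2 = ((k + 3 : Nat) : Int) by push_cast; ring,
      show (j : Int) + 1 - 1 = ((j : Nat) : Int) by ring,
      show (j : Int) + 1 + 2 = ((j + 3 : Nat) : Int) by push_cast; ring]
  rw [PySem.List.slice_natCast, show k + 3 - k = 3 by omega]
  rw [drop_take3 m k (by rw [hm, length_padGrid]; omega)]
  simp only [List.map_cons, List.map_nil, List.sum_cons, List.sum_nil]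
  have hsl : ∀ row : List Int, PySem.List.slice row (some ((j : Nat) : Int)) (some ((j + 3 : Nat) : Int))
      = (row.drop j).take 3 := by
    intro row
    rw [PySem.List.slice_natCast]
    congr 1
    omega
  rw [hsl, hsl, hsl]
  rw [sum_take3_drop, sum_take3_drop, sum_take3_drop]
  have hrda : ∀ a b : Nat, b ≤ w + 1 → (m.getD a []).getD b 0 = mInd S Bd ((a : Int) - 1) ((b : Int) - 1) := by
    intro a b hb
    rw [hm]
    exact read_memInd L w S Bd hS hBd a b hb
  rw [hrda k j (by omega), hrda k (j + 1) (by omega), hrda k (j + 2) (by omega),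
      hrda (k + 1) j (by omega), hrda (k + 1) (j + 1) (by omega), hrda (k + 1) (j + 2) (by omega),
      hrda (k + 2) j (by omega), hrda (k + 2) (j + 1) (by omega), hrda (k + 2) (j + 2) (by omega)]
  push_cast
  rw [neighB_expand]
  rw [show (k : Int) + 1 - 1 = (k : Int) by ring, show (j : Int) + 1 - 1 = (j : Int) by ring,
      show (k : Int) + 2 - 1 = (k : Int) + 1 by ring, show (j : Int) + 2 - 1 = (j : Int) + 1 by ring]
  have hc : mInd S Bd (k : Int) (j : Int) = 1 := by
    rw [mInd, if_pos (Or.inl hmem)]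
  rw [hc]
  ring

lemma readA_eq (L : List (List Char)) (w : Nat) (S Bd : List (Int × Int))
    (hS : okS L w S) (hBd : okBd L w Bd) (k j : Nat) (hjw : j < w) :
    readA (padGrid L w (vOf L w S)) ((k : Int) + 1) ((j : Int) + 1)
      = (if ((k : Int), (j : Int)) ∈ S then 1 else 0) := by
  rw [readA, show (k : Int) + 1 = ((k + 1 : Nat) : Int) by push_cast; ring,
      show (j : Int) + 1 = ((j + 1 : Nat) : Int) by push_cast; ring,
      PySem.List.pyGetD_natCast, PySem.List.pyGetD_natCast,
      read_memInd L w S Bd hS hBd (k + 1) (j + 1) (by omega)]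
  have hb : ((↑(k + 1) : Int) - 1, (↑(j + 1) : Int) - 1) = ((k : Int), (j : Int)) := by
    push_cast; simp
  rw [hb]
  by_cases hmem : ((k : Int), (j : Int)) ∈ S
  · rw [if_pos (Or.inl hmem), if_pos hmem]
  · rw [if_neg _, if_neg hmem]
    rintro (h | h)
    · exact hmem h
    · obtain ⟨r, hp, -, -, -⟩ := (hBd _).mp h
      rw [Prod.mk.injEq] at hp
      have : j = w := by exact_mod_cast hp.2
      omega

def chgQ (S Bd : List (Int × Int)) (r c : Int) : Bool :=
  decide ((r - 1, c - 1) ∈ S ∧ neighB S Bd (r - 1, c - 1) ≤ 3)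

def chgL (S Bd : List (Int × Int)) (R w : Nat) : List (Int × Int) :=
  (PySem.List.pyRange 1 ((R : Int) + 1) 1).flatMap (fun r =>
    ((PySem.List.pyRange 1 ((w : Int) + 1) 1).filter (chgQ S Bd r)).map (fun c => (r, c)))

lemma foldl_pair (l : List Int) (Q : Int → Bool) (r : Int) (st : List (Int × Int) × Int) :
    l.foldl (fun st2 c => if Q c then (st2.1 ++ [(r, c)], st2.2 + 1) else st2) st
      = (st.1 ++ (l.filter Q).map (fun c => (r, c)), st.2 + ((l.filter Q).length : Int)) := by
  induction l generalizing st with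
  | nil => simp
  | cons x t ih =>
    by_cases hx : Q x
    · simp only [List.foldl_cons, hx, if_true, ih, List.filter_cons_of_pos hx]
      rw [Prod.mk.injEq]
      refine ⟨by simp, by simp [List.length_cons]; push_cast; ring⟩
    · simp only [List.foldl_cons, hx, Bool.false_eq_true, if_false, ih,
        List.filter_cons_of_neg (by simpa using hx)]

lemma foldl_pair2 (l : List Int) (A : Int → List (Int × Int)) (st : List (Int × Int) × Int) :
    l.foldl (fun st1 r => (st1.1 ++ A r, st1.2 + ((A r).length : Int))) st
      = (st.1 ++ l.flatMap A, st.2 + ((l.flatMap A).length : Int)) := by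
  induction l generalizing st with
  | nil => simp
  | cons x t ih =>
    simp only [List.foldl_cons, ih, List.flatMap_cons]
    rw [Prod.mk.injEq]
    refine ⟨by simp, by simp; push_cast; ring⟩

lemma scanA_eq (L : List (List Char)) (w : Nat) (S Bd : List (Int × Int))
    (hS : okS L w S) (hBd : okBd L w Bd) (acc : List (Int × Int)) (cnt : Int) :
    scanA (padGrid L w (vOf L w S)) (acc, cnt)
      = (acc ++ chgL S Bd L.length w, cnt + ((chgL S Bd L.length w).length : Int)) := by
  rw [scanA, length_padGrid, headD_padGrid]
  rw [show ((L.length + 2 : Nat) : Int) - 1 = (L.length : Int) + 1 by push_cast; ring]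
  rw [show (((List.replicate (w + 2) (0 : Int)).length : Nat) : Int) - 1 = (w : Int) + 1 by
    simp; push_cast; ring]
  have hinner : ∀ (st1 : List (Int × Int) × Int) (r : Int),
      r ∈ PySem.List.pyRange 1 ((L.length : Int) + 1) 1 →
      (PySem.List.pyRange 1 ((w : Int) + 1) 1).foldl (fun st2 c =>
        if readA (padGrid L w (vOf L w S)) r c == 0 then st2
        else if subSum (padGrid L w (vOf L w S)) r c ≤ 4 then (st2.1 ++ [(r, c)], st2.2 + 1) else st2) st1
      = (st1.1 ++ ((PySem.List.pyRange 1 ((w : Int) + 1) 1).filter (chgQ S Bd r)).map (fun c => (r, c)),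
         st1.2 + (((((PySem.List.pyRange 1 ((w : Int) + 1) 1).filter (chgQ S Bd r)).map (fun c => (r, c))).length : Nat) : Int)) := by
    intro st1 r hr
    rw [PySem.List.mem_pyRange_one] at hr
    obtain ⟨k, hkr, hk⟩ : ∃ k : Nat, r = (k : Int) + 1 ∧ k < L.length := by
      refine ⟨(r - 1).toNat, by omega, by omega⟩
    subst hkr
    rw [PySem.List.foldl_congr_mem (g := fun st2 c =>
      if chgQ S Bd ((k : Int) + 1) c then (st2.1 ++ [((k : Int) + 1, c)], st2.2 + 1) else st2)]
    · rw [foldl_pair]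
      simp
    · intro st2 c hc
      rw [PySem.List.mem_pyRange_one] at hc
      obtain ⟨j, hjc, hj⟩ : ∃ j : Nat, c = (j : Int) + 1 ∧ j < w := by
        refine ⟨(c - 1).toNat, by omega, by omega⟩
      subst hjc
      rw [readA_eq L w S Bd hS hBd k j hj]
      have hsh : ((k : Int) + 1 - 1, (j : Int) + 1 - 1) = ((k : Int), (j : Int)) := by
        rw [Prod.mk.injEq]; exact ⟨by ring, by ring⟩
      by_cases hmem : ((k : Int), (j : Int)) ∈ S
      · rw [if_neg (by simpa using hmem), subSum_eq L w S Bd hS hBd k j hk hj hmem]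
        rw [chgQ, hsh]
        by_cases hn : neighB S Bd ((k : Int), (j : Int)) ≤ 3
        · rw [if_pos (by omega), if_pos (by simp [hmem, hn])]
        · rw [if_neg (by omega), if_neg (by simp [hmem, hn])]
      · rw [if_pos (by simp [hmem]), chgQ, hsh, if_neg (by simp [hmem])]
  rw [PySem.List.foldl_congr_mem (g := fun st1 r =>
    (st1.1 ++ ((PySem.List.pyRange 1 ((w : Int) + 1) 1).filter (chgQ S Bd r)).map (fun c => (r, c)),
     st1.2 + (((((PySem.List.pyRange 1 ((w : Int) + 1) 1).filter (chgQ S Bd r)).map (fun c => (r, c))).length : Nat) : Int)))]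
  · rw [foldl_pair2 _ (fun r => ((PySem.List.pyRange 1 ((w : Int) + 1) 1).filter (chgQ S Bd r)).map (fun c => (r, c)))]
    rfl
  · intro st1 r hr
    exact hinner st1 r hr

def removedOf (S Bd : List (Int × Int)) : List (Int × Int) :=
  S.filter (fun p => !(decide ((4 : Int) ≤ neighB S Bd p)))

def survOf (S Bd : List (Int × Int)) : List (Int × Int) :=
  S.filter (fun p => decide ((4 : Int) ≤ neighB S Bd p))

lemma mem_chgL (L : List (List Char)) (w : Nat) (S Bd : List (Int × Int)) (hS : okS L w S)
    (p : Int × Int) :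
    p ∈ chgL S Bd L.length w ↔ ((p.1 - 1, p.2 - 1) ∈ S ∧ neighB S Bd (p.1 - 1, p.2 - 1) ≤ 3) := by
  rw [chgL]
  simp only [List.mem_flatMap, List.mem_map, List.mem_filter, PySem.List.mem_pyRange_one]
  constructor
  · rintro ⟨r, ⟨hr1, hr2⟩, c, ⟨⟨hc1, hc2⟩, hq⟩, hp⟩
    subst hp
    simpa [chgQ] using hq
  · rintro ⟨hmem, hn⟩
    obtain ⟨r, c, h1, h2, h3, h4, h5⟩ := mem_S_coords hS hmem
    refine ⟨p.1, ⟨by omega, by omega⟩, p.2, ⟨⟨by omega, by omega⟩, ?_⟩, rfl⟩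
    simp [chgQ, hmem, hn]

lemma nodup_flatMap_fst {α : Type} (rs : List α) (k : α → Int) (hrs : (rs.map k).Nodup)
    (g : α → List (Int × Int))
    (hg : ∀ r, (g r).Nodup) (hkey : ∀ r p, p ∈ g r → p.1 = k r) : (rs.flatMap g).Nodup := by
  induction rs with
  | nil => simp
  | cons x t ih =>
    rw [List.map_cons, List.nodup_cons] at hrs
    rw [List.flatMap_cons]
    apply List.Nodup.append (hg x) (ih hrs.2)
    intro p hpx hpt
    rw [List.mem_flatMap] at hpt
    obtain ⟨r, hr, hpr⟩ := hpt
    have h1 := hkey x p hpx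
    have h2 := hkey r p hpr
    exact hrs.1 (by rw [← h1, h2]; exact List.mem_map_of_mem hr)

lemma nodup_chgL (S Bd : List (Int × Int)) (R w : Nat) : (chgL S Bd R w).Nodup := by
  apply nodup_flatMap_fst _ (fun r => r) (by simpa using PySem.List.nodup_pyRange_one _ _)
  · intro r
    apply List.Nodup.map
    · intro a b hab
      simpa using congrArg Prod.snd hab
    · exact List.Nodup.filter _ (PySem.List.nodup_pyRange_one _ _)
  · intro r p hp
    rw [List.mem_map] at hp
    obtain ⟨c, -, hc⟩ := hp
    rw [← hc]

lemma shift_chgL_perm (L : List (List Char)) (w : Nat) (S Bd : List (Int × Int))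
    (hS : okS L w S) :
    ((chgL S Bd L.length w).map (fun p => (p.1 - 1, p.2 - 1))).Perm (removedOf S Bd) := by
  apply (List.perm_ext_iff_of_nodup _ (List.Nodup.filter _ hS.1)).mpr
  · intro q
    rw [List.mem_map]
    constructor
    · rintro ⟨p, hp, hq⟩
      rw [mem_chgL L w S Bd hS] at hp
      simp only [removedOf, List.mem_filter]
      subst hq
      exact ⟨hp.1, by simpa using (by omega : ¬ (4 : Int) ≤ neighB S Bd (p.1 - 1, p.2 - 1))⟩
    · intro hq
      simp only [removedOf, List.mem_filter] at hq
      have hn : neighB S Bd q ≤ 3 := by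
        have := hq.2
        simp at this
        omega
      refine ⟨(q.1 + 1, q.2 + 1), ?_, by simp⟩
      rw [mem_chgL L w S Bd hS]
      simpa using ⟨hq.1, hn⟩
  · apply List.Nodup.map _ (nodup_chgL S Bd L.length w)
    intro a b hab
    rw [Prod.mk.injEq] at hab
    rw [Prod.ext_iff]
    exact ⟨by omega, by omega⟩

lemma length_split (S Bd : List (Int × Int)) :
    S.length = (survOf S Bd).length + (removedOf S Bd).length := by
  unfold survOf removedOf
  exact List.length_eq_length_filter_add _

lemma set_map_range {α : Type} (n : Nat) (f : Nat → α) (j : Nat) (x : α) (hj : j < n) :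
    ((List.range n).map f).set j x = (List.range n).map (fun c => if c = j then x else f c) := by
  apply List.ext_getElem
  · simp
  · intro i h1 h2
    simp only [List.length_set, List.length_map, List.length_range] at h1
    rw [List.getElem_set]
    by_cases hij : j = i
    · subst hij
      simp [hj]
    · simp only [hij, if_false, List.getElem_map, List.getElem_range]
      rw [if_neg (fun h => hij h.symm)]

lemma getElem_padGrid (L : List (List Char)) (w : Nat) (v : Nat → Nat → Int) (i : Nat)
    (h : i < L.length) (h2 : i + 1 < (padGrid L w v).length) :
    (padGrid L w v)[i + 1] = (0 : Int) :: ((List.range ((L.getD i []).length)).map (v i) ++ [0]) := by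
  simp only [padGrid, List.getElem_cons_succ]
  rw [List.getElem_append_left (by simpa using h)]
  simp

lemma setZero_padGrid (L : List (List Char)) (w : Nat) (v : Nat → Nat → Int) (k j : Nat)
    (hk : k < L.length) (hj : j < (L.getD k []).length) :
    setZero (padGrid L w v) ((k : Int) + 1, (j : Int) + 1)
      = padGrid L w (fun r c => if r = k ∧ c = j then 0 else v r c) := by
  rw [setZero]
  simp only
  rw [show (k : Int) + 1 = ((k + 1 : Nat) : Int) by push_cast; ring,
      show (j : Int) + 1 = ((j + 1 : Nat) : Int) by push_cast; ring,
      PySem.List.pyGetD_natCast, PySem.List.pySetD_natCast, PySem.List.pySetD_natCast]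
  have hrow : (padGrid L w v).getD (k + 1) [] = (0 : Int) :: ((List.range ((L.getD k []).length)).map (v k) ++ [0]) := by
    rw [List.getD_eq_getElem _ _ (by rw [length_padGrid]; omega)]
    exact getElem_padGrid L w v k hk (by rw [length_padGrid]; omega)
  rw [hrow]
  apply List.ext_getElem
  · simp [padGrid]
  · intro i h1 h2
    rw [List.getElem_set]
    rcases i with _ | i
    · rw [if_neg (by omega)]
      rfl
    · simp only [length_padGrid] at h2
      by_cases hik : i = k
      · subst hik
        rw [if_pos rfl, getElem_padGrid L w _ i hk (by rw [length_padGrid]; omega)]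
        rw [List.set_cons_succ, List.set_append_left _ _ (by simpa using hj), set_map_range _ _ _ _ hj]
        congr 1
        congr 1
        apply List.map_congr_left
        intro c _
        by_cases hcj : c = j
        · simp [hcj]
        · simp [hcj]
      · rw [if_neg (by omega)]
        by_cases hiL : i < L.length
        · rw [getElem_padGrid L w v i hiL (by rw [length_padGrid]; omega),
             getElem_padGrid L w _ i hiL (by rw [length_padGrid]; omega)]
          congr 1
          congr 1
          apply List.map_congr_left
          intro c _
          rw [if_neg (by tauto)]
        · have hiR : i = L.length := by omega
          subst hiR
          simp only [padGrid, List.getElem_cons_succ]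
          rw [List.getElem_append_right (by simp), List.getElem_append_right (by simp)]
          simp

lemma foldl_setZero (L : List (List Char)) (w : Nat) (cl : List (Int × Int)) (v : Nat → Nat → Int)
    (hcl : ∀ p ∈ cl, ∃ k j : Nat, p = ((k : Int) + 1, (j : Int) + 1) ∧ k < L.length ∧ j < (L.getD k []).length) :
    cl.foldl setZero (padGrid L w v)
      = padGrid L w (fun r c => if ((r : Int) + 1, (c : Int) + 1) ∈ cl then 0 else v r c) := by
  induction cl generalizing v with
  | nil => simp
  | cons p t ih =>
    obtain ⟨k, j, hp, hk, hj⟩ := hcl p (by simp)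
    subst hp
    rw [List.foldl_cons, setZero_padGrid L w v k j hk hj,
        ih _ (fun q hq => hcl q (by simp [hq]))]
    apply padGrid_congr
    intro r c hr hc
    by_cases hmem : ((r : Int) + 1, (c : Int) + 1) ∈ t
    · simp [hmem]
    · simp only [hmem, if_false, List.mem_cons]
      by_cases heq : r = k ∧ c = j
      · rw [if_pos heq, if_pos (Or.inl (by rw [Prod.mk.injEq]; exact ⟨by rw [heq.1], by rw [heq.2]⟩))]
      · rw [if_neg heq, if_neg]
        rintro (h | h)
        · rw [Prod.mk.injEq] at h
          obtain ⟨ha, hb⟩ := h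
          exact heq ⟨by exact_mod_cast (by omega : (r : Int) = k), by exact_mod_cast (by omega : (c : Int) = j)⟩
        · exact h.elim

lemma update_eq (L : List (List Char)) (w : Nat) (S Bd : List (Int × Int))
    (hS : okS L w S) :
    (chgL S Bd L.length w).foldl setZero (padGrid L w (vOf L w S))
      = padGrid L w (vOf L w (survOf S Bd)) := by
  rw [foldl_setZero]
  · apply padGrid_congr
    intro r c hr hc
    by_cases hcw : c < w
    · by_cases hmem : ((r : Int) + 1, (c : Int) + 1) ∈ chgL S Bd L.length w
      · rw [if_pos hmem, mem_chgL L w S Bd hS] at *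
        simp only at hmem
        rw [vOf, if_pos hcw, if_neg]
        intro hmem2
        simp only [survOf, List.mem_filter] at hmem2
        have h1 : ((r : Int) + 1 - 1, (c : Int) + 1 - 1) = ((r : Int), (c : Int)) := by
          rw [Prod.mk.injEq]; exact ⟨by ring, by ring⟩
        rw [h1] at hmem
        have := hmem2.2
        simp at this
        omega
      · rw [if_neg hmem, mem_chgL L w S Bd hS] at *
        simp only at hmem
        have h1 : ((r : Int) + 1 - 1, (c : Int) + 1 - 1) = ((r : Int), (c : Int)) := by
          rw [Prod.mk.injEq]; exact ⟨by ring, by ring⟩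
        rw [h1] at hmem
        rw [vOf, vOf, if_pos hcw, if_pos hcw]
        by_cases hmS : ((r : Int), (c : Int)) ∈ S
        · by_cases hsurv : ((r : Int), (c : Int)) ∈ survOf S Bd
          · rw [if_pos hmS, if_pos hsurv]
          · exfalso
            simp only [survOf, List.mem_filter] at hsurv
            push_neg at hsurv
            have := hsurv hmS
            simp at this
            exact hmem ⟨hmS, by omega⟩
        · rw [if_neg hmS, if_neg]
          intro h
          exact hmS (List.mem_of_mem_filter h)
    · rw [if_neg, vOf, vOf, if_neg hcw, if_neg hcw]
      rw [mem_chgL L w S Bd hS]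
      rintro ⟨hmem, -⟩
      obtain ⟨r', c', h1, h2, -, -, h5⟩ := mem_S_coords hS hmem
      have : c = c' := by exact_mod_cast (by omega : (c : Int) = (c' : Int))
      omega
  · intro p hp
    rw [mem_chgL L w S Bd hS] at hp
    obtain ⟨r', c', h1, h2, h3, h4, h5⟩ := mem_S_coords hS hp.1
    refine ⟨r', c', ?_, h3, h4⟩
    rw [Prod.mk.injEq]
    constructor <;> omega

lemma okS_surv (L : List (List Char)) (w : Nat) (S Bd : List (Int × Int)) (hS : okS L w S) :
    okS L w (survOf S Bd) :=
  ⟨List.Nodup.filter _ hS.1, fun p hp => hS.2 p (List.mem_of_mem_filter hp)⟩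

lemma chgL_length (L : List (List Char)) (w : Nat) (S Bd : List (Int × Int)) (hS : okS L w S) :
    (chgL S Bd L.length w).length = (removedOf S Bd).length := by
  have h := (shift_chgL_perm L w S Bd hS).length_eq
  simpa using h

lemma chgL_nil_iff (L : List (List Char)) (w : Nat) (S Bd : List (Int × Int)) (hS : okS L w S) :
    chgL S Bd L.length w = [] ↔ (survOf S Bd).length = S.length := by
  have hlen := length_split S Bd
  constructor
  · intro h
    have : (removedOf S Bd).length = 0 := by rw [← chgL_length L w S Bd hS, h]; rfl
    omega
  · intro h
    have : (chgL S Bd L.length w).length = 0 := by rw [chgL_length L w S Bd hS]; omega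
    exact List.length_eq_zero_iff.mp this

lemma lockstep (L : List (List Char)) (w : Nat) (Bd : List (Int × Int)) (total : Int)
    (hBd : okBd L w Bd) :
    ∀ (n : Nat) (S : List (Int × Int)) (cnt : Int), okS L w S → cnt = total - (S.length : Int) →
    solveLoopA n (padGrid L w (vOf L w S)) cnt = solveLoopB total Bd n S := by
  intro n
  induction n with
  | zero =>
    intro S cnt hS hcnt
    simp only [solveLoopA, solveLoopB, hcnt]
  | succ n ih =>
    intro S cnt hS hcnt
    simp only [solveLoopA, solveLoopB]
    rw [scanA_eq L w S Bd hS hBd [] cnt]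
    simp only [List.nil_append]
    rw [show List.filter (fun p => decide ((4 : Int) ≤ neighB S Bd p)) S = survOf S Bd from rfl]
    by_cases hstop : chgL S Bd L.length w = []
    · rw [if_pos hstop, if_pos ((chgL_nil_iff L w S Bd hS).mp hstop)]
      rw [hstop, hcnt]
      simp
    · rw [if_neg hstop, if_neg (fun h => hstop ((chgL_nil_iff L w S Bd hS).mpr h))]
      rw [update_eq L w S Bd hS]
      apply ih _ _ (okS_surv L w S Bd hS)
      have h1 := chgL_length L w S Bd hS
      have h2 := length_split S Bd
      rw [hcnt, h1]
      push_cast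
      omega

-- ---- initial state ----
def Lof (lines : List String) : List (List Char) := lines.map String.toList
def wof (lines : List String) : Nat := ((Lof lines).headD []).length

def cells0 (lines : List String) : List (Int × Int) :=
  (PySem.List.enumerate lines 0).flatMap (fun rl =>
    (PySem.List.enumerate (rl.2.toList.take (wof lines + 1)) 0).filterMap (fun cc =>
      if cc.2 ≠ '.' then some (rl.1, cc.1) else none))

def active0 (lines : List String) : List (Int × Int) :=
  (cells0 lines).filter (fun p => decide (p.2 < (wof lines : Int)))

def border0 (lines : List String) : List (Int × Int) :=
  PySem.Set.diff (cells0 lines) (active0 lines)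

lemma filterMap_ite_eq {α β : Type} (l : List α) (P : α → Prop) [DecidablePred P] (g : α → β) :
    l.filterMap (fun x => if P x then some (g x) else none)
      = (l.filter (fun x => decide (P x))).map g := by
  induction l with
  | nil => rfl
  | cons x t ih =>
    by_cases hx : P x
    · rw [List.filterMap_cons, List.filter_cons]
      simp only [hx, if_true, decide_true, ih, List.map_cons]
    · rw [List.filterMap_cons, List.filter_cons]
      simp only [hx, if_false, decide_false, ih]
      simp

lemma getD_Lof (lines : List String) (r : Nat) (hr : r < lines.length) :
    (Lof lines).getD r [] = lines[r].toList := by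
  rw [Lof, List.getD_eq_getElem _ _ (by simpa using hr)]
  simp

lemma mem_cells0 (lines : List String) (p : Int × Int) :
    p ∈ cells0 lines ↔ ∃ r c : Nat, p = ((r : Int), (c : Int)) ∧ r < lines.length ∧
      c < ((Lof lines).getD r []).length ∧ c ≤ wof lines ∧
      ((Lof lines).getD r []).getD c '.' ≠ '.' := by
  rw [cells0]
  simp only [List.mem_flatMap, PySem.List.mem_enumerate_iff, filterMap_ite_eq,
    List.mem_map, List.mem_filter]
  constructor
  · rintro ⟨rl, ⟨r, hr, hrl⟩, cc, ⟨hcc, hne⟩, hp⟩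
    subst hrl
    obtain ⟨c, hc, hcc2⟩ := hcc
    subst hcc2
    simp only at hp hne
    refine ⟨r, c, by simpa using hp.symm, hr, ?_, ?_, ?_⟩
    · rw [getD_Lof lines r hr]
      have := List.length_take_le (wof lines + 1) lines[r].toList
      simp only [List.length_take] at hc
      omega
    · simp only [List.length_take] at hc
      omega
    · rw [getD_Lof lines r hr]
      simp only [List.length_take] at hc
      rw [List.getD_eq_getElem _ _ (by omega)]
      have hg : (lines[r].toList.take (wof lines + 1))[c] = lines[r].toList[c]'(by omega) :=
        List.getElem_take
      simpa [hg] using hne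
  · rintro ⟨r, c, hp, hr, hcl, hcw, hne⟩
    rw [getD_Lof lines r hr] at hcl hne
    rw [List.getD_eq_getElem _ _ (by omega)] at hne
    refine ⟨(r, lines[r]), ⟨r, hr, by simp⟩,
      ((c : Int), lines[r].toList[c]'(by omega)), ⟨?_, by simpa using hne⟩, by simp [hp]⟩
    refine ⟨c, by show c < (lines[r].toList.take (wof lines + 1)).length; rw [List.length_take]; omega, ?_⟩
    have hg : (lines[r].toList.take (wof lines + 1))[c]'(by rw [List.length_take]; omega)
        = lines[r].toList[c]'(by omega) := List.getElem_take
    simp [hg]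

lemma nodup_cells0 (lines : List String) : (cells0 lines).Nodup := by
  rw [cells0]
  apply nodup_flatMap_fst _ (fun rl => rl.1)
  · rw [PySem.List.map_fst_enumerate]
    exact PySem.List.nodup_pyRange_one _ _
  · intro rl
    rw [filterMap_ite_eq]
    have hpw : (PySem.List.enumerate (rl.2.toList.take (wof lines + 1)) 0).Pairwise
        (fun p q => p.1 < q.1) := PySem.List.pairwise_lt_enumerate _ _
    have hpw2 := hpw.filter (fun cc => decide (cc.2 ≠ '.'))
    have hpw3 : ((List.filter (fun cc => decide (cc.2 ≠ '.'))
        (PySem.List.enumerate (rl.2.toList.take (wof lines + 1)) 0)).map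
          (fun cc => (rl.1, cc.1))).Pairwise (fun p q : Int × Int => p.2 < q.2) := by
      rw [List.pairwise_map]
      exact hpw2.imp (fun h => h)
    apply hpw3.imp
    intro a b hab heq
    rw [heq] at hab
    omega
  · intro rl p hp
    rw [filterMap_ite_eq, List.mem_map] at hp
    obtain ⟨cc, -, hcc⟩ := hp
    rw [← hcc]

lemma mem_active0 (lines : List String) (p : Int × Int) :
    p ∈ active0 lines ↔ ∃ r c : Nat, p = ((r : Int), (c : Int)) ∧ r < lines.length ∧
      c < ((Lof lines).getD r []).length ∧ c < wof lines ∧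
      ((Lof lines).getD r []).getD c '.' ≠ '.' := by
  rw [active0, List.mem_filter, mem_cells0]
  constructor
  · rintro ⟨⟨r, c, hp, h1, h2, h3, h4⟩, hlt⟩
    subst hp
    simp only [decide_eq_true_eq] at hlt
    exact ⟨r, c, rfl, h1, h2, by exact_mod_cast hlt, h4⟩
  · rintro ⟨r, c, hp, h1, h2, h3, h4⟩
    subst hp
    exact ⟨⟨r, c, rfl, h1, h2, by omega, h4⟩, by simp; exact_mod_cast h3⟩

lemma okS_active0 (lines : List String) : okS (Lof lines) (wof lines) (active0 lines) := by
  refine ⟨List.Nodup.filter _ (nodup_cells0 lines), ?_⟩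
  intro p hp
  rw [mem_active0] at hp
  obtain ⟨r, c, hp, h1, h2, h3, -⟩ := hp
  exact ⟨r, c, hp, by simpa [Lof] using h1, h2, h3⟩

lemma okBd_border0 (lines : List String) : okBd (Lof lines) (wof lines) (border0 lines) := by
  intro p
  rw [border0, PySem.Set.mem_diff, mem_cells0, mem_active0]
  constructor
  · rintro ⟨⟨r, c, hp, h1, h2, h3, h4⟩, hna⟩
    subst hp
    have hcw : c = wof lines := by
      by_contra hne
      exact hna ⟨r, c, rfl, h1, h2, by omega, h4⟩
    subst hcw
    exact ⟨r, rfl, by simpa [Lof] using h1, h2, h4⟩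
  · rintro ⟨r, hp, h1, h2, h3⟩
    subst hp
    have h1' : r < lines.length := by simpa [Lof] using h1
    refine ⟨⟨r, wof lines, rfl, h1', h2, le_refl _, h3⟩, ?_⟩
    rintro ⟨r', c', hp, -, -, hcw, -⟩
    rw [Prod.mk.injEq] at hp
    have : wof lines = c' := by exact_mod_cast hp.2
    omega

def matA (lines : List String) (wa : Nat) : List (List Int) :=
  List.replicate (wa + 2) (0 : Int)
    :: (lines.map (fun line => line.toList.map cellInt)).map (fun row => (0 : Int) :: row ++ [0])
    ++ [List.replicate (wa + 2) (0 : Int)]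

lemma wA_eq (lines : List String) :
    ((lines.map (fun line => line.toList.map cellInt)).headD []).length = wof lines := by
  cases lines with
  | nil => rfl
  | cons x t => simp [wof, Lof]

lemma wB_eq (lines : List String) : (lines.headD "").toList.length = wof lines := by
  cases lines with
  | nil => rfl
  | cons x t => simp [wof, Lof]

lemma init_grid (lines : List String) :
    matA lines (wof lines)
      = padGrid (Lof lines) (wof lines) (vOf (Lof lines) (wof lines) (active0 lines)) := by
  apply List.ext_getElem
  · simp [matA, padGrid, Lof]
  · intro i h1 h2
    rcases i with _ | i
    · rfl
    simp only [matA, padGrid, List.getElem_cons_succ]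
    simp only [matA, List.length_cons, List.length_append, List.length_map, List.length_nil] at h1
    by_cases hi : i < lines.length
    · rw [List.getElem_append_left (by simpa using hi),
          List.getElem_append_left (by simpa [Lof] using hi)]
      rw [List.getElem_cons_succ]
      simp only [List.getElem_map, List.getElem_range]
      show (0 : Int) :: (lines[i].toList.map cellInt ++ [0]) = _
      congr 1
      have hL : (Lof lines).getD i [] = lines[i].toList := getD_Lof lines i hi
      congr 1
      apply List.ext_getElem
      · simp only [List.length_map, List.length_range]
        rw [hL]
      · intro c hc1 hc2
        simp only [List.length_map] at hc1
        rw [List.getElem_map, List.getElem_map, List.getElem_range]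
        have hchar : ((Lof lines).getD i []).getD c '.' = lines[i].toList[c]'(by omega) := by
          rw [hL, List.getD_eq_getElem _ _ (by omega)]
        by_cases hw : c < wof lines
        · rw [vOf, if_pos hw]
          by_cases hdot : lines[i].toList[c]'(by omega) = '.'
          · rw [cellInt, if_pos (by simpa using hdot), if_neg]
            rw [mem_active0]
            rintro ⟨r', c', hp, -, -, -, hne⟩
            rw [Prod.mk.injEq] at hp
            have hr' : i = r' := by exact_mod_cast hp.1
            have hc' : c = c' := by exact_mod_cast hp.2
            rw [← hr', ← hc'] at hne
            exact hne (hchar.trans hdot)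
          · rw [cellInt, if_neg (by simpa using hdot), if_pos]
            rw [mem_active0]
            exact ⟨i, c, rfl, hi, by rw [hL]; omega, hw, by rw [hchar]; exact hdot⟩
        · rw [vOf, if_neg hw, cellVal, hchar, cellInt]
    · have hieq : i = lines.length := by omega
      subst hieq
      rw [List.getElem_append_right (by simp), List.getElem_append_right (by simp [Lof])]
      simp [Lof]

lemma fuel_ok (lines : List String) :
    (active0 lines).length ≤ (matA lines (wof lines)).flatten.length := by
  have h1 : (active0 lines).length ≤ (cells0 lines).length := List.length_filter_le _ _
  have h2 : (cells0 lines).length ≤ (lines.map (fun l => l.toList.length)).sum := by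
    rw [cells0, List.length_flatMap]
    have hpt : ∀ rl ∈ PySem.List.enumerate lines 0,
        ((PySem.List.enumerate (rl.2.toList.take (wof lines + 1)) 0).filterMap (fun cc =>
          if cc.2 ≠ '.' then some (rl.1, cc.1) else none)).length ≤ rl.2.toList.length := by
      intro rl _
      calc ((PySem.List.enumerate (rl.2.toList.take (wof lines + 1)) 0).filterMap _).length
          ≤ (PySem.List.enumerate (rl.2.toList.take (wof lines + 1)) 0).length :=
            List.length_filterMap_le _ _
        _ = (rl.2.toList.take (wof lines + 1)).length := PySem.List.length_enumerate _ _
        _ ≤ rl.2.toList.length := by rw [List.length_take]; omega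
    calc ((PySem.List.enumerate lines 0).map _).sum
        ≤ ((PySem.List.enumerate lines 0).map (fun rl => rl.2.toList.length)).sum :=
          List.sum_le_sum hpt
      _ = (lines.map (fun l => l.toList.length)).sum := by
          rw [show (fun rl : Int × String => rl.2.toList.length)
                = (fun l : String => l.toList.length) ∘ (fun rl : Int × String => rl.2) from rfl,
              ← List.map_map, PySem.List.map_snd_enumerate]
  have h3 : (lines.map (fun l => l.toList.length)).sum ≤ (matA lines (wof lines)).flatten.length := by
    rw [matA, List.length_flatten]
    simp only [List.map_cons, List.map_append, List.map_map, List.sum_cons, List.sum_append,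
      List.map_cons, List.map_nil, List.sum_cons, List.sum_nil]
    have : (lines.map (List.length ∘ ((fun row => (0 : Int) :: row ++ [0]) ∘ fun line => line.toList.map cellInt))).sum
        = (lines.map (fun l => l.toList.length + 2)).sum := by
      congr 1
      apply List.map_congr_left
      intro l _
      simp
    rw [this]
    have h4 : (lines.map (fun l => l.toList.length)).sum ≤ (lines.map (fun l => l.toList.length + 2)).sum :=
      List.sum_le_sum (fun l _ => by omega)
    omega
  omega

-- ---- B-side: the 8-neighbor list ----
lemma nbrsB_eq (r c : Int) : nbrsB r c =
    [(r-1,c-1),(r-1,c),(r-1,c+1),(r,c-1),(r,c+1),(r+1,c-1),(r+1,c),(r+1,c+1)] := by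
  simp [nbrsB, List.flatMap]
  constructor <;> ring_nf

lemma mem_nbrsB (x : Int × Int) (r c : Int) :
    x ∈ nbrsB r c ↔ (r - 1 ≤ x.1 ∧ x.1 ≤ r + 1 ∧ c - 1 ≤ x.2 ∧ x.2 ≤ c + 1 ∧ ¬(x.1 = r ∧ x.2 = c)) := by
  obtain ⟨a, b⟩ := x
  rw [nbrsB_eq]
  simp [Prod.ext_iff]
  omega

lemma nbrsB_nodup (r c : Int) : (nbrsB r c).Nodup := by
  rw [nbrsB_eq]
  simp [List.nodup_cons, Prod.ext_iff]
  omega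

lemma nbrsB_symm (p q : Int × Int) : q ∈ nbrsB p.1 p.2 ↔ p ∈ nbrsB q.1 q.2 := by
  rw [mem_nbrsB, mem_nbrsB]
  omega

-- ---- the abstract erosion count and stability ----
def curr (U G : List (Int × Int)) : List (Int × Int) := U.filter (fun x => decide (x ∉ G))

def supp (Bd S : List (Int × Int)) (p : Int × Int) : Nat :=
  (nbrsB p.1 p.2).countP (fun q => decide (q ∈ S ∨ q ∈ Bd))

def StableOn (Bd S : List (Int × Int)) : Prop := ∀ p ∈ S, 4 ≤ supp Bd S p

lemma offsetsB_points (r c : Int) :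
    offsetsB.map (fun o => (r + o.1, c + o.2)) = nbrsB r c := by
  rw [nbrsB_eq, show offsetsB = [(-1,-1),(-1,0),(-1,1),(0,-1),(0,1),(1,-1),(1,0),(1,1)] from rfl]
  simp [Prod.ext_iff]
  omega

lemma neighB_eq_supp (S Bd : List (Int × Int)) (p : Int × Int) :
    neighB S Bd p = (supp Bd S p : Int) := by
  rw [supp, ← PySem.List.sum_map_ite_one_zero (fun q => decide (q ∈ S ∨ q ∈ Bd)) (nbrsB p.1 p.2),
      neighB, ← offsetsB_points p.1 p.2, List.map_map]
  congr 1
  apply List.map_congr_left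
  intro o _
  simp

lemma supp_congr (Bd S T : List (Int × Int)) (h : ∀ x, x ∈ S ↔ x ∈ T) (p : Int × Int) :
    supp Bd S p = supp Bd T p :=
  List.countP_congr (fun x _ => by simp [h x])

lemma supp_mono (Bd S T : List (Int × Int)) (h : ∀ x ∈ S, x ∈ T) (p : Int × Int) :
    supp Bd S p ≤ supp Bd T p := by
  apply List.countP_mono_left
  intro x _ hx
  simp only [decide_eq_true_eq] at hx ⊢
  rcases hx with hx | hx
  · exact Or.inl (h x hx)
  · exact Or.inr hx

lemma countP_diff_single {α : Type} [DecidableEq α] (l : List α) (x : α) (A B : α → Bool)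
    (hAB : ∀ y ∈ l, y ≠ x → A y = B y) (hA : A x = true) (hB : B x = false) (hl : l.Nodup) :
    l.countP A = l.countP B + (if x ∈ l then 1 else 0) := by
  induction l with
  | nil => simp
  | cons a t ih =>
    rw [List.nodup_cons] at hl
    rw [List.countP_cons, List.countP_cons]
    by_cases hax : a = x
    · subst hax
      rw [hA, hB]
      have ht : t.countP A = t.countP B :=
        List.countP_congr (fun y hy => by
          rw [hAB y (List.mem_cons_of_mem _ hy) (fun h => hl.1 (h ▸ hy))])
      rw [ht, if_pos (List.mem_cons_self)]
      simp
    · have hAa : A a = B a := hAB a List.mem_cons_self (fun h => hax h)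
      rw [hAa, ih (fun y hy hne => hAB y (List.mem_cons_of_mem _ hy) hne) hl.2]
      have hxa : x ≠ a := fun h => hax h.symm
      have hiff : (x ∈ a :: t) ↔ (x ∈ t) := by simp [List.mem_cons, hxa]
      by_cases hxt : x ∈ t
      · rw [if_pos hxt, if_pos (hiff.mpr hxt)]
        omega
      · rw [if_neg hxt, if_neg (fun h => hxt (hiff.mp h))]
        omega

lemma curr_nil (U : List (Int × Int)) : curr U [] = U := by simp [curr]

lemma mem_curr (U G : List (Int × Int)) (x : Int × Int) :
    x ∈ curr U G ↔ x ∈ U ∧ x ∉ G := by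
  simp [curr]

lemma supp_erase (Bd U P : List (Int × Int)) (hBdU : ∀ x ∈ Bd, x ∉ U)
    (p : Int × Int) (hpU : p ∈ U) (hpP : p ∉ P) (q : Int × Int) :
    supp Bd (curr U P) q
      = supp Bd (curr U (P ++ [p])) q + (if q ∈ nbrsB p.1 p.2 then 1 else 0) := by
  rw [supp, supp]
  rw [countP_diff_single (nbrsB q.1 q.2) p
      (fun y => decide (y ∈ curr U P ∨ y ∈ Bd))
      (fun y => decide (y ∈ curr U (P ++ [p]) ∨ y ∈ Bd))
      (fun y _ hne => by
        have h : (y ∈ curr U P ∨ y ∈ Bd) ↔ (y ∈ curr U (P ++ [p]) ∨ y ∈ Bd) := by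
          rw [mem_curr, mem_curr]
          simp [hne]
        simp [h])
      (by simp [mem_curr, hpU, hpP])
      (by
        simp only [decide_eq_false_iff_not]
        rintro (h | h)
        · rw [mem_curr] at h
          simp at h
        · exact hBdU p h hpU)
      (nbrsB_nodup q.1 q.2)]
  by_cases h : q ∈ nbrsB p.1 p.2
  · rw [if_pos ((nbrsB_symm p q).mp h), if_pos h]
  · rw [if_neg (fun hc => h ((nbrsB_symm p q).mpr hc)), if_neg h]

lemma length_curr_grow (U : List (Int × Int)) (hU : U.Nodup) (G : List (Int × Int))
    (q : Int × Int) (hqU : q ∈ U) (hqG : q ∉ G) :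
    (curr U G).length = (curr U (G ++ [q])).length + 1 := by
  rw [curr, curr, ← List.countP_eq_length_filter, ← List.countP_eq_length_filter]
  rw [countP_diff_single U q (fun x => decide (x ∉ G)) (fun x => decide (x ∉ G ++ [q]))
      (fun y _ hne => by simp [hne]) (by simp [hqG]) (by simp) hU, if_pos hqU]

lemma length_eq_of_mem_iff {α : Type} {l₁ l₂ : List α} (h₁ : l₁.Nodup) (h₂ : l₂.Nodup)
    (h : ∀ x, x ∈ l₁ ↔ x ∈ l₂) : l₁.length = l₂.length :=
  ((List.perm_ext_iff_of_nodup h₁ h₂).mpr h).length_eq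

lemma set_add_of_not_mem (s : PySem.Set (Int × Int)) (x : Int × Int) (h : x ∉ s) :
    PySem.Set.add s x = s ++ [x] := by
  simp [PySem.Set.add, PySem.Set.contains, h]

-- ---- the synchronous pass loop reaches the greatest stable subset ----
lemma syncChar (Bd : List (Int × Int)) (total : Int) :
    ∀ (fuel : Nat) (S : List (Int × Int)), S.Nodup → S.length < fuel →
    ∃ S', solveLoopB total Bd fuel S = total - (S'.length : Int) ∧ S'.Nodup ∧
      (∀ x ∈ S', x ∈ S) ∧ StableOn Bd S' ∧
      (∀ T, StableOn Bd T → (∀ x ∈ T, x ∈ S) → ∀ x ∈ T, x ∈ S') := by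
  intro fuel
  induction fuel with
  | zero => intro S _ h; omega
  | succ n ih =>
    intro S hnd hlen
    simp only [solveLoopB]
    by_cases hfix : (S.filter (fun p => decide ((4:Int) ≤ neighB S Bd p))).length = S.length
    · rw [if_pos hfix]
      refine ⟨S, rfl, hnd, fun x hx => hx, ?_, fun T _ hTS => hTS⟩
      intro q hq
      have h4 : (4 : Int) ≤ neighB S Bd q :=
        of_decide_eq_true (List.length_filter_eq_length_iff.mp hfix q hq)
      rw [neighB_eq_supp] at h4
      exact_mod_cast h4
    · rw [if_neg hfix]
      have hlt : (S.filter (fun p => decide ((4:Int) ≤ neighB S Bd p))).length < S.length :=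
        lt_of_le_of_ne (List.length_filter_le _ _) hfix
      obtain ⟨S', h1, h2, h3, h4, h5⟩ :=
        ih (S.filter (fun p => decide ((4:Int) ≤ neighB S Bd p))) (hnd.filter _) (by omega)
      refine ⟨S', h1, h2, fun x hx => List.mem_of_mem_filter (h3 x hx), h4, ?_⟩
      intro T hT hTS
      apply h5 T hT
      intro x hx
      rw [List.mem_filter]
      refine ⟨hTS x hx, ?_⟩
      rw [decide_eq_true_eq, neighB_eq_supp]
      have := le_trans (hT x hx) (supp_mono Bd T S (fun y hy => hTS y hy) x)
      exact_mod_cast this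

lemma ite_mem_append_single (q q0 : Int × Int) (V : List (Int × Int)) (hne : q ≠ q0) :
    (if q ∈ V ++ [q0] then (1 : Int) else 0) = (if q ∈ V then 1 else 0) := by
  by_cases hv : q ∈ V
  · simp [hv]
  · simp [hv, hne]

-- ---- the worklist loop: invariants ----
structure AInv (Bd U P st : List (Int × Int)) (deg : PySem.Dict (Int × Int) Int)
    (gone : List (Int × Int)) : Prop where
  hPnd : P.Nodup
  hstnd : st.Nodup
  hgnd : gone.Nodup
  hmem : ∀ x : Int × Int, x ∈ gone ↔ (x ∈ P ∨ x ∈ st)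
  hdisj : ∀ x ∈ P, x ∉ st
  hPU : ∀ x ∈ P, x ∈ U
  hstU : ∀ x ∈ st, x ∈ U
  hkeys : deg.keys = U
  hdeg : ∀ q ∈ U, q ∉ gone → deg.getD q 0 = (supp Bd (curr U P) q : Int)
  hthr : ∀ q ∈ U, q ∉ gone → (4 : Int) ≤ deg.getD q 0
  hT : ∀ T, StableOn Bd T → (∀ x ∈ T, x ∈ U) → ∀ x ∈ T, x ∉ gone

structure MInv (Bd U : List (Int × Int)) (p : Int × Int) (P V st : List (Int × Int))
    (deg : PySem.Dict (Int × Int) Int) (gone : List (Int × Int)) (M : Nat) : Prop where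
  hstnd : st.Nodup
  hgnd : gone.Nodup
  hmem : ∀ x : Int × Int, x ∈ gone ↔ (x ∈ P ∨ x = p ∨ x ∈ st)
  hdisj : ∀ x : Int × Int, (x ∈ P ∨ x = p) → x ∉ st
  hstU : ∀ x ∈ st, x ∈ U
  hkeys : deg.keys = U
  hdeg : ∀ q ∈ U, q ∉ gone →
    deg.getD q 0 = (supp Bd (curr U P) q : Int) - (if q ∈ V then 1 else 0)
  hthr : ∀ q ∈ U, q ∉ gone → (4 : Int) ≤ deg.getD q 0
  hT : ∀ T, StableOn Bd T → (∀ x ∈ T, x ∈ U) → ∀ x ∈ T, x ∉ gone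
  hmeas : st.length + (curr U gone).length = M

lemma inner_fold (Bd U : List (Int × Int)) (hU : U.Nodup) (hBdU : ∀ x ∈ Bd, x ∉ U)
    (p : Int × Int) (P : List (Int × Int)) (hpU : p ∈ U) (hpP : p ∉ P) (M : Nat) :
    ∀ (L V : List (Int × Int)), nbrsB p.1 p.2 = V ++ L →
    ∀ (st : List (Int × Int)) (deg : PySem.Dict (Int × Int) Int) (gone : List (Int × Int)),
      MInv Bd U p P V st deg gone M →
      MInv Bd U p P (V ++ L) (L.foldl innerB (st, deg, gone)).1
        (L.foldl innerB (st, deg, gone)).2.1 (L.foldl innerB (st, deg, gone)).2.2 M := by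
  intro L
  induction L with
  | nil =>
    intro V hsplit st deg gone hinv
    simpa using hinv
  | cons q0 L' ih =>
    intro V hsplit st deg gone hinv
    have hnd8 : (V ++ q0 :: L').Nodup := hsplit ▸ nbrsB_nodup p.1 p.2
    have hq0V : q0 ∉ V := fun h => (List.disjoint_of_nodup_append hnd8) h (by simp)
    have hq0nb : q0 ∈ nbrsB p.1 p.2 := by rw [hsplit]; simp
    have hsplit' : nbrsB p.1 p.2 = (V ++ [q0]) ++ L' := by rw [hsplit]; simp
    have hgoal : V ++ q0 :: L' = (V ++ [q0]) ++ L' := by simp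
    rw [List.foldl_cons, hgoal]
    by_cases hg1 : q0 ∈ U
    · by_cases hg2 : q0 ∈ gone
      · -- q0 already marked: the state is unchanged
        have hstep : innerB (st, deg, gone) q0 = (st, deg, gone) := by
          simp [innerB, PySem.Set.contains, hg2]
        rw [hstep]
        refine ih (V ++ [q0]) hsplit' st deg gone ?_
        refine { hinv with hdeg := ?_ }
        intro q hq hqg
        have hne : q ≠ q0 := fun h => hqg (h ▸ hg2)
        rw [hinv.hdeg q hq hqg, ite_mem_append_single q q0 V hne]
      · -- q0 live and unmarked: its count is decremented
        have hcont : deg.contains q0 = true := by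
          rw [PySem.Dict.contains_eq_decide_mem_keys, hinv.hkeys]
          simp [hg1]
        have hkeys' : (deg.modify q0 0 (fun v => v - 1)).keys = U := by
          rw [PySem.Dict.keys_modify, PySem.Dict.keys_insert_of_contains _ _ hcont, hinv.hkeys]
        have hgv : ∀ q, (deg.modify q0 0 (fun v => v - 1)).getD q 0
            = if q = q0 then deg.getD q0 0 - 1 else deg.getD q 0 := fun q => by
          rw [PySem.Dict.getD_modify]
        have hval : (deg.modify q0 0 (fun v => v - 1)).getD q0 0
            = (supp Bd (curr U P) q0 : Int) - 1 := by
          rw [hgv, if_pos rfl, hinv.hdeg q0 hg1 hg2, if_neg hq0V]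
          ring
        have hstep : innerB (st, deg, gone) q0
            = (if (deg.modify q0 0 (fun v => v - 1)).getD q0 0 < 4
               then (st ++ [q0], deg.modify q0 0 (fun v => v - 1), PySem.Set.add gone q0)
               else (st, deg.modify q0 0 (fun v => v - 1), gone)) := by
          simp [innerB, hcont, PySem.Set.contains, hg2]
        rw [hstep]
        have hq0st : q0 ∉ st := fun h => hg2 ((hinv.hmem q0).mpr (Or.inr (Or.inr h)))
        have herase := supp_erase Bd U P hBdU p hpU hpP q0
        rw [if_pos hq0nb] at herase
        by_cases hlt : (deg.modify q0 0 (fun v => v - 1)).getD q0 0 < 4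
        · rw [if_pos hlt, set_add_of_not_mem gone q0 hg2]
          refine ih (V ++ [q0]) hsplit' (st ++ [q0]) _ (gone ++ [q0]) ?_
          refine { hstnd := ?_, hgnd := ?_, hmem := ?_, hdisj := ?_, hstU := ?_,
                   hkeys := hkeys', hdeg := ?_, hthr := ?_, hT := ?_, hmeas := ?_ }
          · exact List.Nodup.append hinv.hstnd (by simp) (by simp [hq0st])
          · exact List.Nodup.append hinv.hgnd (by simp) (by simp [hg2])
          · intro x
            rw [List.mem_append, hinv.hmem x]
            simp only [List.mem_append, List.mem_singleton]
            tauto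
          · intro x hx
            have hxg : x ∈ gone := (hinv.hmem x).mpr (by tauto)
            have h1 := hinv.hdisj x hx
            simp only [List.mem_append, List.mem_singleton]
            rintro (h | rfl)
            · exact h1 h
            · exact hg2 hxg
          · intro x hx
            rcases List.mem_append.mp hx with h | h
            · exact hinv.hstU x h
            · rw [List.mem_singleton] at h
              exact h ▸ hg1
          · intro q hq hqg
            have hne : q ≠ q0 := fun h => hqg (by simp [h])
            have hqg' : q ∉ gone := fun h => hqg (by simp [h])
            rw [hgv, if_neg hne, hinv.hdeg q hq hqg', ite_mem_append_single q q0 V hne]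
          · intro q hq hqg
            have hne : q ≠ q0 := fun h => hqg (by simp [h])
            have hqg' : q ∉ gone := fun h => hqg (by simp [h])
            rw [hgv, if_neg hne]
            exact hinv.hthr q hq hqg'
          · intro T hT hTU x hx
            have hxg := hinv.hT T hT hTU x hx
            simp only [List.mem_append, List.mem_singleton]
            rintro (h | rfl)
            · exact hxg h
            · -- x = q0 ∈ T is impossible: its count fell below 4
              have hTP' : ∀ y ∈ T, y ∈ curr U (P ++ [p]) := by
                intro y hy
                rw [mem_curr]
                refine ⟨hTU y hy, ?_⟩
                simp only [List.mem_append, List.mem_singleton]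
                rintro (hyP | rfl)
                · exact hinv.hT T hT hTU y hy ((hinv.hmem y).mpr (Or.inl hyP))
                · exact hinv.hT T hT hTU y hy ((hinv.hmem y).mpr (Or.inr (Or.inl rfl)))
              have h1 : 4 ≤ supp Bd T x := hT x hx
              have h2 : supp Bd T x ≤ supp Bd (curr U (P ++ [p])) x :=
                supp_mono Bd T _ hTP' x
              rw [hval] at hlt
              omega
          · rw [← hinv.hmeas, List.length_append,
              length_curr_grow U hU gone q0 hg1 hg2]
            simp
            omega
        · rw [if_neg hlt]
          refine ih (V ++ [q0]) hsplit' st _ gone ?_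
          refine { hstnd := hinv.hstnd, hgnd := hinv.hgnd, hmem := hinv.hmem,
                   hdisj := hinv.hdisj, hstU := hinv.hstU, hkeys := hkeys',
                   hdeg := ?_, hthr := ?_, hT := hinv.hT, hmeas := hinv.hmeas }
          · intro q hq hqg
            rw [hgv]
            by_cases hne : q = q0
            · subst hne
              rw [if_pos rfl, hinv.hdeg _ hq hqg, if_neg hq0V,
                if_pos (show q ∈ V ++ [q] by simp)]
              ring
            · rw [if_neg hne, hinv.hdeg q hq hqg, ite_mem_append_single q q0 V hne]
          · intro q hq hqg
            rw [hgv]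
            by_cases hne : q = q0
            · subst hne
              rw [if_pos rfl]
              rw [hgv, if_pos rfl] at hlt
              omega
            · rw [if_neg hne]
              exact hinv.hthr q hq hqg
    · -- q0 not an erodible cell: the guard fails
      have hcont : deg.contains q0 = false := by
        rw [PySem.Dict.contains_eq_decide_mem_keys, hinv.hkeys]
        simp [hg1]
      have hstep : innerB (st, deg, gone) q0 = (st, deg, gone) := by
        simp [innerB, hcont]
      rw [hstep]
      refine ih (V ++ [q0]) hsplit' st deg gone ?_
      refine { hinv with hdeg := ?_ }
      intro q hq hqg
      have hne : q ≠ q0 := fun h => hg1 (h ▸ hq)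
      rw [hinv.hdeg q hq hqg, ite_mem_append_single q q0 V hne]

set_option maxHeartbeats 1000000 in
lemma async_loop (Bd U : List (Int × Int)) (hU : U.Nodup) (hBdU : ∀ x ∈ Bd, x ∉ U) :
    ∀ (fuel : Nat) (P st : List (Int × Int)) (deg : PySem.Dict (Int × Int) Int)
      (gone : List (Int × Int)), AInv Bd U P st deg gone →
      st.length + (curr U gone).length < fuel →
      (loopB fuel st deg gone).Nodup ∧ (∀ x ∈ loopB fuel st deg gone, x ∈ U) ∧
      StableOn Bd (curr U (loopB fuel st deg gone)) ∧
      (∀ T, StableOn Bd T → (∀ x ∈ T, x ∈ U) → ∀ x ∈ T, x ∉ loopB fuel st deg gone) := by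
  intro fuel
  induction fuel with
  | zero => intro P st deg gone _ h; omega
  | succ n ih =>
    intro P st deg gone hinv hfuel
    match hst : st.getLast? with
    | none =>
      rw [List.getLast?_eq_none_iff] at hst
      subst hst
      have hres : loopB (n + 1) [] deg gone = gone := by
        simp [loopB]
      rw [hres]
      refine ⟨hinv.hgnd, ?_, ?_, ?_⟩
      · intro x hx
        rcases (hinv.hmem x).mp hx with h | h
        · exact hinv.hPU x h
        · simp at h
      · intro q hq
        rw [mem_curr] at hq
        have h1 := hinv.hthr q hq.1 hq.2
        rw [hinv.hdeg q hq.1 hq.2] at h1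
        have h2 : supp Bd (curr U P) q = supp Bd (curr U gone) q := by
          apply supp_congr
          intro x
          rw [mem_curr, mem_curr]
          constructor
          · rintro ⟨hxU, hxP⟩
            exact ⟨hxU, fun hxg => by
              rcases (hinv.hmem x).mp hxg with h | h
              · exact hxP h
              · simp at h⟩
          · rintro ⟨hxU, hxg⟩
            exact ⟨hxU, fun hxP => hxg ((hinv.hmem x).mpr (Or.inl hxP))⟩
        rw [h2] at h1
        exact_mod_cast h1
      · intro T hT hTU x hx
        exact hinv.hT T hT hTU x hx
    | some p =>
      rw [List.getLast?_eq_some_iff] at hst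
      obtain ⟨st', rfl⟩ := hst
      have hres : loopB (n + 1) (st' ++ [p]) deg gone
          = loopB n ((nbrsB p.1 p.2).foldl innerB (st', deg, gone)).1
              ((nbrsB p.1 p.2).foldl innerB (st', deg, gone)).2.1
              ((nbrsB p.1 p.2).foldl innerB (st', deg, gone)).2.2 := by
        simp [loopB]
      have hpU : p ∈ U := hinv.hstU p (by simp)
      have hpP : p ∉ P := fun h => hinv.hdisj p h (by simp)
      have hpg : p ∈ gone := (hinv.hmem p).mpr (Or.inr (by simp))
      have hstnd' : st'.Nodup := (List.nodup_append.mp hinv.hstnd).1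
      have hpst' : p ∉ st' := by
        have := List.disjoint_of_nodup_append hinv.hstnd
        intro h
        exact this h (by simp)
      have hminv : MInv Bd U p P [] st' deg gone
          (st'.length + (curr U gone).length) := by
        refine { hstnd := hstnd', hgnd := hinv.hgnd, hmem := ?_, hdisj := ?_,
                 hstU := ?_, hkeys := hinv.hkeys, hdeg := ?_, hthr := hinv.hthr,
                 hT := hinv.hT, hmeas := rfl }
        · intro x
          rw [hinv.hmem x]
          simp only [List.mem_append, List.mem_singleton]
          constructor
          · rintro (h | h)
            · exact Or.inl h
            · rcases h with h | h
              · exact Or.inr (Or.inr h)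
              · exact Or.inr (Or.inl h)
          · rintro (h | h | h)
            · exact Or.inl h
            · exact Or.inr (Or.inr h)
            · exact Or.inr (Or.inl h)
        · intro x hx
          rintro hxs
          rcases hx with h | rfl
          · exact hinv.hdisj x h (List.mem_append.mpr (Or.inl hxs))
          · exact hpst' hxs
        · intro x hx
          exact hinv.hstU x (List.mem_append.mpr (Or.inl hx))
        · intro q hq hqg
          rw [hinv.hdeg q hq hqg]
          simp
      have hmid := inner_fold Bd U hU hBdU p P hpU hpP
        (st'.length + (curr U gone).length) (nbrsB p.1 p.2) [] rfl st' deg gone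
        (by simpa using hminv)
      rw [hres]
      set s := (nbrsB p.1 p.2).foldl innerB (st', deg, gone) with hs
      -- recover an AInv for (P ++ [p]) from the mid invariant with V = all neighbors
      have hA : AInv Bd U (P ++ [p]) s.1 s.2.1 s.2.2 := by
        refine { hPnd := ?_, hstnd := hmid.hstnd, hgnd := hmid.hgnd, hmem := ?_,
                 hdisj := ?_, hPU := ?_, hstU := hmid.hstU, hkeys := hmid.hkeys,
                 hdeg := ?_, hthr := hmid.hthr, hT := hmid.hT }
        · exact List.Nodup.append hinv.hPnd (by simp) (by simp [hpP])
        · intro x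
          rw [hmid.hmem x]
          simp only [List.mem_append, List.mem_singleton]
          constructor
          · rintro (h | h | h)
            · exact Or.inl (Or.inl h)
            · exact Or.inl (Or.inr h)
            · exact Or.inr h
          · rintro ((h | h) | h)
            · exact Or.inl h
            · exact Or.inr (Or.inl h)
            · exact Or.inr (Or.inr h)
        · intro x hx
          apply hmid.hdisj x
          rcases List.mem_append.mp hx with h | h
          · exact Or.inl h
          · rw [List.mem_singleton] at h
            exact Or.inr h
        · intro x hx
          rcases List.mem_append.mp hx with h | h
          · exact hinv.hPU x h
          · rw [List.mem_singleton] at h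
            exact h ▸ hpU
        · intro q hq hqg
          have h1 := hmid.hdeg q hq hqg
          simp only [List.nil_append] at h1
          have h2 := supp_erase Bd U P hBdU p hpU hpP q
          rw [h1]
          by_cases hqn : q ∈ nbrsB p.1 p.2
          · rw [if_pos hqn] at h2 ⊢
            omega
          · rw [if_neg hqn] at h2 ⊢
            omega
      apply ih (P ++ [p]) s.1 s.2.1 s.2.2 hA
      rw [hmid.hmeas]
      simp only [List.length_append, List.length_singleton] at hfuel
      omega

-- ---- B-side initial state ----
def rawLive (lines : List String) : List (Int × Int) :=
  (PySem.List.enumerate lines 0).flatMap (fun rl =>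
    (PySem.List.enumerate rl.2.toList 0).filterMap (fun cc =>
      if cc.2 ≠ '.' then some (rl.1, cc.1) else none))

def erodL (lines : List String) (w : Nat) : List (Int × Int) :=
  (PySem.List.enumerate lines 0).flatMap (fun rl =>
    (PySem.List.enumerate (rl.2.toList.take w) 0).filterMap (fun cc =>
      if cc.2 ≠ '.' then some (rl.1, cc.1) else none))

lemma liveB_eq (lines : List String) : liveB lines = PySem.Set.ofList (rawLive lines) := rfl

lemma degB_eq (lines : List String) (w : Nat) (live : PySem.Set (Int × Int)) :
    degB lines w live
      = (erodL lines w).foldl (fun d p => d.insert p (cntLiveB live p)) PySem.Dict.empty := rfl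

lemma mem_rawLive (lines : List String) (p : Int × Int) :
    p ∈ rawLive lines ↔ ∃ r c : Nat, p = ((r : Int), (c : Int)) ∧ r < lines.length ∧
      c < ((Lof lines).getD r []).length ∧
      ((Lof lines).getD r []).getD c '.' ≠ '.' := by
  rw [rawLive]
  simp only [List.mem_flatMap, PySem.List.mem_enumerate_iff, filterMap_ite_eq,
    List.mem_map, List.mem_filter]
  constructor
  · rintro ⟨rl, ⟨r, hr, hrl⟩, cc, ⟨hcc, hne⟩, hp⟩
    subst hrl
    obtain ⟨c, hc, hcc2⟩ := hcc
    subst hcc2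
    simp only at hp hne
    refine ⟨r, c, by simpa using hp.symm, hr, ?_, ?_⟩
    · rw [getD_Lof lines r hr]
      exact hc
    · rw [getD_Lof lines r hr, List.getD_eq_getElem _ _ hc]
      simpa using hne
  · rintro ⟨r, c, hp, hr, hcl, hne⟩
    rw [getD_Lof lines r hr] at hcl hne
    rw [List.getD_eq_getElem _ _ hcl] at hne
    exact ⟨(r, lines[r]), ⟨r, hr, by simp⟩,
      ((c : Int), lines[r].toList[c]'hcl), ⟨⟨c, hcl, by simp⟩, by simpa using hne⟩,
      by simp [hp]⟩

lemma mem_erodL (lines : List String) (w : Nat) (p : Int × Int) :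
    p ∈ erodL lines w ↔ ∃ r c : Nat, p = ((r : Int), (c : Int)) ∧ r < lines.length ∧
      c < ((Lof lines).getD r []).length ∧ c < w ∧
      ((Lof lines).getD r []).getD c '.' ≠ '.' := by
  rw [erodL]
  simp only [List.mem_flatMap, PySem.List.mem_enumerate_iff, filterMap_ite_eq,
    List.mem_map, List.mem_filter]
  constructor
  · rintro ⟨rl, ⟨r, hr, hrl⟩, cc, ⟨hcc, hne⟩, hp⟩
    subst hrl
    obtain ⟨c, hc, hcc2⟩ := hcc
    subst hcc2
    simp only at hp hne
    simp only [List.length_take] at hc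
    refine ⟨r, c, by simpa using hp.symm, hr, ?_, by omega, ?_⟩
    · rw [getD_Lof lines r hr]
      omega
    · rw [getD_Lof lines r hr]
      rw [List.getD_eq_getElem _ _ (by omega)]
      have hg : (lines[r].toList.take w)[c] = lines[r].toList[c]'(by omega) :=
        List.getElem_take
      simpa [hg] using hne
  · rintro ⟨r, c, hp, hr, hcl, hcw, hne⟩
    rw [getD_Lof lines r hr] at hcl hne
    rw [List.getD_eq_getElem _ _ (by omega)] at hne
    refine ⟨(r, lines[r]), ⟨r, hr, by simp⟩,
      ((c : Int), lines[r].toList[c]'(by omega)), ⟨?_, by simpa using hne⟩, by simp [hp]⟩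
    refine ⟨c, by show c < (lines[r].toList.take w).length; rw [List.length_take]; omega, ?_⟩
    have hg : (lines[r].toList.take w)[c]'(by rw [List.length_take]; omega)
        = lines[r].toList[c]'(by omega) := List.getElem_take
    simp [hg]

lemma nodup_erodL (lines : List String) (w : Nat) : (erodL lines w).Nodup := by
  rw [erodL]
  apply nodup_flatMap_fst _ (fun rl => rl.1)
  · rw [PySem.List.map_fst_enumerate]
    exact PySem.List.nodup_pyRange_one _ _
  · intro rl
    rw [filterMap_ite_eq]
    have hpw : (PySem.List.enumerate (rl.2.toList.take w) 0).Pairwise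
        (fun p q => p.1 < q.1) := PySem.List.pairwise_lt_enumerate _ _
    have hpw2 := hpw.filter (fun cc => decide (cc.2 ≠ '.'))
    have hpw3 : ((List.filter (fun cc => decide (cc.2 ≠ '.'))
        (PySem.List.enumerate (rl.2.toList.take w) 0)).map
          (fun cc => (rl.1, cc.1))).Pairwise (fun p q : Int × Int => p.2 < q.2) := by
      rw [List.pairwise_map]
      exact hpw2.imp (fun h => h)
    apply hpw3.imp
    intro a b hab heq
    rw [heq] at hab
    omega
  · intro rl p hp
    rw [filterMap_ite_eq, List.mem_map] at hp
    obtain ⟨cc, -, hcc⟩ := hp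
    rw [← hcc]

lemma mem_U_iff_active0 (lines : List String) (x : Int × Int) :
    x ∈ erodL lines (wof lines) ↔ x ∈ active0 lines := by
  rw [mem_erodL, mem_active0]

lemma mem_live_split (lines : List String) (y : Int × Int) (hy : y.2 ≤ (wof lines : Int)) :
    y ∈ rawLive lines ↔ (y ∈ erodL lines (wof lines) ∨ y ∈ border0 lines) := by
  rw [mem_rawLive, mem_erodL]
  constructor
  · rintro ⟨r, c, hp, h1, h2, h4⟩
    by_cases hcw : c < wof lines
    · exact Or.inl ⟨r, c, hp, h1, h2, hcw, h4⟩
    · have hcv : c = wof lines := by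
        have : (c : Int) ≤ (wof lines : Int) := by
          rw [hp] at hy
          simpa using hy
        omega
      subst hcv
      refine Or.inr ((okBd_border0 lines y).mpr ⟨r, ?_, by simpa [Lof] using h1, h2, h4⟩)
      rw [hp]
  · rintro (⟨r, c, hp, h1, h2, h3, h4⟩ | hbd)
    · exact ⟨r, c, hp, h1, h2, h4⟩
    · obtain ⟨r, hp, h1, h2, h3⟩ := (okBd_border0 lines y).mp hbd
      exact ⟨r, wof lines, hp, by simpa [Lof] using h1, h2, h3⟩

lemma getD_foldl_insert_fn (l : List (Int × Int)) (f : Int × Int → Int)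
    (d0 : PySem.Dict (Int × Int) Int) (q : Int × Int) :
    (l.foldl (fun d x => d.insert x (f x)) d0).getD q 0
      = if q ∈ l then f q else d0.getD q 0 := by
  induction l generalizing d0 with
  | nil => simp
  | cons x t ih =>
    rw [List.foldl_cons, ih]
    by_cases hqt : q ∈ t
    · simp [hqt]
    · rw [if_neg hqt, PySem.Dict.getD_insert]
      by_cases hqx : q = x
      · simp [hqx]
      · simp [hqx, hqt]

lemma keys_degB (lines : List String) (w : Nat) (live : PySem.Set (Int × Int)) :
    (degB lines w live).keys = erodL lines w := by
  rw [degB_eq]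
  have h := PySem.Dict.keys_foldl_insert (erodL lines w)
    (fun _ p => cntLiveB live p) PySem.Dict.empty
  simp only at h
  rw [h, PySem.Dict.keys_empty]
  have : PySem.Set.update ([] : List (Int × Int)) (erodL lines w)
      = PySem.Set.ofList (erodL lines w) := by
    rw [PySem.Set.ofList_eq_foldl]
    rfl
  rw [this, PySem.Set.ofList_eq_self_of_nodup _ (nodup_erodL lines w)]

lemma getD_degB (lines : List String) (w : Nat) (live : PySem.Set (Int × Int)) (q : Int × Int) :
    (degB lines w live).getD q 0 = if q ∈ erodL lines w then cntLiveB live q else 0 := by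
  rw [degB_eq, getD_foldl_insert_fn]
  rw [PySem.Dict.getD_empty]

lemma cnt_eq_supp (lines : List String) (q : Int × Int)
    (hq : q ∈ erodL lines (wof lines)) :
    cntLiveB (liveB lines) q
      = (supp (border0 lines) (erodL lines (wof lines)) q : Int) := by
  obtain ⟨r, c, hp, h1, h2, h3, h4⟩ := (mem_erodL lines (wof lines) q).mp hq
  rw [cntLiveB, supp,
    PySem.List.sum_map_ite_one_zero (fun y => PySem.Set.contains (liveB lines) y) (nbrsB q.1 q.2)]
  congr 1
  apply List.countP_congr
  intro y hy
  have hy2 : y.2 ≤ (wof lines : Int) := by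
    rw [mem_nbrsB] at hy
    have : q.2 = (c : Int) := by rw [hp]
    have hc : (c : Int) < (wof lines : Int) := by exact_mod_cast h3
    omega
  have hsplit := mem_live_split lines y hy2
  have hcont : PySem.Set.contains (liveB lines) y = decide (y ∈ rawLive lines) := by
    rw [liveB_eq]
    by_cases hmem : y ∈ rawLive lines
    · simp [PySem.Set.contains, PySem.Set.mem_ofList, hmem]
    · simp [PySem.Set.contains, PySem.Set.mem_ofList, hmem]
  rw [hcont]
  simp [hsplit]

-- solve_alt with the width named
def altAt (lines : List String) (w : Nat) : Int :=
  let live := liveB lines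
  let deg := degB lines w live
  let stack := deg.keys.filter (fun p => decide (deg.getD p 0 < 4))
  let gone := PySem.Set.ofList stack
  ((loopB (deg.size + 1) stack deg gone).length : Int)

lemma solve_alt_eq (lines : List String) :
    solve_alt lines = altAt lines ((lines.headD "").toList.length) := rfl

-- ===== VERDICT (by name: the statement is the Claim_ definition above) =====
theorem solve_spec : Claim_equal_solve := by
  unfold Claim_equal_solve
  intro lines _ _
  show solve lines = solve_alt lines
  have hUnd : (erodL lines (wof lines)).Nodup := nodup_erodL lines (wof lines)
  have hBdU : ∀ x ∈ border0 lines, x ∉ erodL lines (wof lines) := by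
    intro x hx hxU
    obtain ⟨r, hp, -, -, -⟩ := (okBd_border0 lines x).mp hx
    obtain ⟨r', c', hp', -, -, h3, -⟩ := (mem_erodL lines (wof lines) x).mp hxU
    rw [hp] at hp'
    rw [Prod.mk.injEq] at hp'
    have : wof lines = c' := by exact_mod_cast hp'.2
    omega
  -- A's grid loop reduced to the synchronous sparse pass loop, then characterized
  have hA : solve lines
      = solveLoopA ((matA lines (wof lines)).flatten.length + 1) (matA lines (wof lines)) 0 := by
    rw [show matA lines (wof lines)
        = matA lines (((lines.map (fun line => line.toList.map cellInt)).headD []).length) from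
      by rw [wA_eq]]
    rfl
  rw [hA, init_grid lines]
  rw [lockstep (Lof lines) (wof lines) (border0 lines) ((active0 lines).length : Int)
      (okBd_border0 lines) _ (active0 lines) 0 (okS_active0 lines) (by simp)]
  obtain ⟨S', hS'eq, hS'nd, hS'sub, hS'stab, hS'great⟩ :=
    syncChar (border0 lines) ((active0 lines).length : Int)
      ((padGrid (Lof lines) (wof lines) (vOf (Lof lines) (wof lines) (active0 lines))).flatten.length + 1)
      (active0 lines) (okS_active0 lines).1
      (by
        have h := fuel_ok lines
        rw [init_grid lines] at h
        omega)
  rw [hS'eq]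
  -- B's worklist loop characterized
  rw [solve_alt_eq, wB_eq]
  have hkeys := keys_degB lines (wof lines) (liveB lines)
  have hget : ∀ q ∈ erodL lines (wof lines),
      (degB lines (wof lines) (liveB lines)).getD q 0
        = (supp (border0 lines) (erodL lines (wof lines)) q : Int) := by
    intro q hq
    rw [getD_degB, if_pos hq, cnt_eq_supp lines q hq]
  have hstnd : ((degB lines (wof lines) (liveB lines)).keys.filter
      (fun p => decide ((degB lines (wof lines) (liveB lines)).getD p 0 < 4))).Nodup := by
    rw [hkeys]
    exact hUnd.filter _
  have hgone0 := PySem.Set.ofList_eq_self_of_nodup _ hstnd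
  have hBeq : altAt lines (wof lines)
      = ((loopB ((degB lines (wof lines) (liveB lines)).size + 1)
          ((degB lines (wof lines) (liveB lines)).keys.filter
            (fun p => decide ((degB lines (wof lines) (liveB lines)).getD p 0 < 4)))
          (degB lines (wof lines) (liveB lines))
          ((degB lines (wof lines) (liveB lines)).keys.filter
            (fun p => decide ((degB lines (wof lines) (liveB lines)).getD p 0 < 4)))).length : Int) := by
    simp only [altAt]
    rw [hgone0]
  rw [hBeq]
  set deg := degB lines (wof lines) (liveB lines) with hdegd
  set U := erodL lines (wof lines) with hUd
  set Bd := border0 lines with hBdd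
  set stack0 := deg.keys.filter (fun p => decide (deg.getD p 0 < 4)) with hstackd
  have hstU : ∀ x ∈ stack0, x ∈ U := by
    intro x hx
    rw [hstackd, List.mem_filter, hkeys] at hx
    exact hx.1
  have hAinv : AInv Bd U [] stack0 deg stack0 := by
    refine { hPnd := List.nodup_nil, hstnd := hstnd, hgnd := hstnd,
             hmem := by intro x; simp, hdisj := by intro x hx; simp at hx,
             hPU := by intro x hx; simp at hx, hstU := hstU, hkeys := hkeys,
             hdeg := ?_, hthr := ?_, hT := ?_ }
    · intro q hq hqg
      rw [curr_nil]
      exact hget q hq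
    · intro q hq hqg
      have hnot : ¬ (deg.getD q 0 < 4) := by
        intro hlt
        exact hqg (by
          rw [hstackd, List.mem_filter, hkeys]
          exact ⟨hq, by simp [hlt]⟩)
      omega
    · intro T hT hTU x hx hxg
      rw [hstackd, List.mem_filter] at hxg
      have h4 : 4 ≤ supp Bd T x := hT x hx
      have hm : supp Bd T x ≤ supp Bd U x := supp_mono Bd T U hTU x
      have hlt := of_decide_eq_true hxg.2
      rw [hget x (hTU x hx)] at hlt
      omega
  have hsize : deg.size = U.length := by
    have h : deg.keys.length = U.length := by rw [hkeys]
    simpa [PySem.Dict.size, PySem.Dict.keys] using h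
  have hmeas0 : stack0.length + (curr U stack0).length = U.length := by
    have hsplit := List.length_eq_length_filter_add (l := U)
      (fun p => decide (deg.getD p 0 < 4))
    have h1 : stack0 = U.filter (fun p => decide (deg.getD p 0 < 4)) := by
      rw [hstackd, hkeys]
    have h2 : U.filter (fun p => !(decide (deg.getD p 0 < 4))) = curr U stack0 := by
      apply List.filter_congr
      intro x hxU
      have hmemiff : (x ∈ stack0) ↔ (deg.getD x 0 < 4) := by
        rw [h1, List.mem_filter]
        simp [hxU]
      by_cases hlt : deg.getD x 0 < 4
      · simp [hmemiff, hlt, show ¬ (4 : Int) ≤ deg.getD x 0 by omega]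
      · simp [hmemiff, hlt, show (4 : Int) ≤ deg.getD x 0 by omega]
    rw [h2, ← h1] at hsplit
    omega
  obtain ⟨hgnd, hgU, hgstab, hggreat⟩ :=
    async_loop Bd U hUnd hBdU (deg.size + 1) [] stack0 deg stack0 hAinv
      (by rw [hsize]; omega)
  set g := loopB (deg.size + 1) stack0 deg stack0 with hgd
  have hcurrnd : (curr U g).Nodup := hUnd.filter _
  have hmemeq : ∀ x, x ∈ S' ↔ x ∈ curr U g := by
    intro x
    constructor
    · intro hx
      rw [mem_curr]
      have hxU : x ∈ U := (mem_U_iff_active0 lines x).mpr (hS'sub x hx)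
      exact ⟨hxU, hggreat S' hS'stab
        (fun y hy => (mem_U_iff_active0 lines y).mpr (hS'sub y hy)) x hx⟩
    · intro hx
      apply hS'great (curr U g) hgstab
      · intro y hy
        rw [mem_curr] at hy
        exact (mem_U_iff_active0 lines y).mp hy.1
      · exact hx
  have hlen1 : S'.length = (curr U g).length :=
    length_eq_of_mem_iff hS'nd hcurrnd hmemeq
  have hlen2 : (active0 lines).length = U.length :=
    length_eq_of_mem_iff (List.Nodup.filter _ (nodup_cells0 lines)) hUnd
      (fun x => (mem_U_iff_active0 lines x).symm)
  have hlen3 : U.length = (U.filter (fun x => decide (x ∈ g))).length + (curr U g).length := by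
    have h := List.length_eq_length_filter_add (l := U) (fun x => decide (x ∈ g))
    have hc : U.filter (fun x => !(decide (x ∈ g))) = curr U g := by
      apply List.filter_congr
      intro x _
      simp
    rw [hc] at h
    exact h
  have hlen4 : (U.filter (fun x => decide (x ∈ g))).length = g.length := by
    apply length_eq_of_mem_iff (hUnd.filter _) hgnd
    intro x
    rw [List.mem_filter]
    constructor
    · rintro ⟨-, h⟩
      exact of_decide_eq_true h
    · intro h
      exact ⟨hgU x h, decide_eq_true h⟩
  omega
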